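-- pv_equiv track=rewrite | github.com/srvrless/kek-testovoe | task4.py | compute_language_barrier
-- ===== SOURCE A (Python) =====
-- def compute_language_barrier(N, languages, hierarchy):
--     graph = {}
--     for i in range(0, 2 * (N + 1), 2):
--         manager = hierarchy[i]
--         subordinate = hierarchy[i + 1]
--         if manager not in graph:
--             graph[manager] = []
--         graph[manager].append(subordinate)
--
--     def find_language_barrier(employee, language):
--         queue = [(employee, 0)]
--         visited = set()
--         while queue:
--             current_employee, barrier = queue.pop(0)
--             if languages[current_employee] == language:
--                 return barrier
--             visited.add(current_employee)
--             if current_employee in graph: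
--                 for subordinate in graph[current_employee]:
--                     if subordinate not in visited:
--                         queue.append((subordinate, barrier + 1))
--         return -1
--
--
--     barriers = []
--     for i in range(1, N + 1):
--         language = languages[i - 1]
--         barrier = find_language_barrier(i, language)
--         barriers.append(barrier)
--
--     return barriers
-- ===== SOURCE B (Python) =====
-- def compute_language_barrier(N, languages, hierarchy):
--     graph = {}
--     for i in range(0, 2 * (N + 1), 2):
--         manager = hierarchy[i]
--         subordinate = hierarchy[i + 1]
--         if manager not in graph:
--             graph[manager] = []
--         graph[manager].append(subordinate)
--
--     def barrier(start, target):
--         # phase 1: reachable node set (iterative LIFO closure, no distances)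
--         nodes = [start]
--         seen = {start}
--         stack = [start]
--         while stack:
--             x = stack.pop()
--             for c in graph.get(x, []):
--                 if c not in seen:
--                     seen.add(c)
--                     nodes.append(c)
--                     stack.append(c)
--         # phase 2: Bellman-Ford-style value iteration on the reachable set:
--         # d[x] = length of a shortest walk from x to a node speaking target.
--         d = {x: None for x in nodes}
--         for _ in range(len(nodes)):
--             nd = {}
--             for x in nodes:
--                 if languages[x] == target:
--                     nd[x] = 0
--                 else:
--                     best = None
--                     for c in graph.get(x, []):
--                         v = d[c]
--                         if v is not None and (best is None or v < best):
--                             best = v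
--                     nd[x] = None if best is None else best + 1
--             if nd == d:
--                 break
--             d = nd
--         r = d[start]
--         return -1 if r is None else r
--
--     return [barrier(i, languages[i - 1]) for i in range(1, N + 1)]
-- ===== Notes on version B (the rewrite author's own statement) =====
-- stated objective: alternative
-- what changed: A's per-employee FIFO BFS that carries distances is replaced by a two-phase algorithm: an iterative LIFO reachability closure (no distances) followed by Bellman-Ford-style value iteration d[x] = shortest walk from x to a node speaking the target, run to a fixpoint over the reachable set.
-- outside the precondition, e.g. on compute_language_barrier(3, [2, 3, 3, 1], [-1, -3, 7, -2, 2, 7, -1, -3]): A returns [-1, 0, -1], B raises IndexError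
import Mathlib
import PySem

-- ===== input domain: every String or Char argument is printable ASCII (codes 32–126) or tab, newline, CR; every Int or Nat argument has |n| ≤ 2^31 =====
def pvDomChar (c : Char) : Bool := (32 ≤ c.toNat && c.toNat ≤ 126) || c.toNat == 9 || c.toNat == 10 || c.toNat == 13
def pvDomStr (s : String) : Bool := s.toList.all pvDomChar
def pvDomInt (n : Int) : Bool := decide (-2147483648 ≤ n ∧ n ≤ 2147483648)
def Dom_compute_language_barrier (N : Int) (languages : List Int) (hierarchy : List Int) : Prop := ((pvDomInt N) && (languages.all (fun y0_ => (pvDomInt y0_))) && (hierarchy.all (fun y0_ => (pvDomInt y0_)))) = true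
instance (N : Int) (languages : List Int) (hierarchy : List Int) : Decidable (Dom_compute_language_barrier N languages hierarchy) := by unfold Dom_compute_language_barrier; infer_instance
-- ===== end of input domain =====

-- B replaces A's per-employee FIFO BFS with distances by a two-phase algorithm: an iterative
-- LIFO reachability closure (no distances) followed by Bellman-Ford-style value iteration
-- (d[x] = shortest walk from x to a node speaking the target) on the reachable set; objective: alternative.

-- Two strict/weak filter-length facts used by the termination measures of both ports
-- (Python's `while` loops terminate; the Lean recursions need an explicit measure).
theorem pvFilterMono {α : Type} {p q : α → Bool} (himp : ∀ a, q a = true → p a = true)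
    (l : List α) : (l.filter q).length ≤ (l.filter p).length := by
  rw [← List.countP_eq_length_filter, ← List.countP_eq_length_filter]
  exact List.countP_mono_left (fun a _ h => himp a h)

theorem pvFilterLt {α : Type} {p q : α → Bool} (himp : ∀ a, q a = true → p a = true)
    {l : List α} {c : α} (hc : c ∈ l) (hp : p c = true) (hq : q c = false) :
    (l.filter q).length < (l.filter p).length := by
  obtain ⟨l1, l2, rfl⟩ := List.append_of_mem hc
  have h1 := pvFilterMono himp l1
  have h2 := pvFilterMono himp l2
  simp only [List.filter_append, List.filter_cons, hp, hq, List.length_append]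
  simp only [List.length_cons, Bool.false_eq_true, if_true, if_false]
  omega

-- ===== PORT A =====
def pvBuildGraphA (N : Int) (hierarchy : List Int) : Option (PySem.Dict Int (List Int)) :=
  (PySem.List.pyRange 0 (2*(N+1)) 2).foldl
    (fun acc i =>
      match acc with
      | none => none
      | some g =>
        match PySem.List.pyGet? hierarchy i, PySem.List.pyGet? hierarchy (i+1) with
        | some m, some s =>
            let g1 := if PySem.Dict.contains g m then g else PySem.Dict.insert g m []
            some (PySem.Dict.insert g1 m (PySem.Dict.getD g1 m [] ++ [s]))
        | _, _ => none)
    (some PySem.Dict.empty)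

-- all subordinate values stored in the graph (ghost bound used only by the termination measures)
def pvAllSubs (g : PySem.Dict Int (List Int)) : List Int := (PySem.Dict.values g).flatten

-- find_language_barrier's `while queue:` loop; `none` = an IndexError from languages[current].
-- `allowed` and the `c ∈ allowed` test are a totality guard for the termination measure only;
-- on every call reachable from compute_language_barrier the guard is provably true.
def pvLoopA (g : PySem.Dict Int (List Int)) (languages : List Int) (language : Int)
    (allowed : List Int) (q : List (Int × Int)) (vis : PySem.Set Int) : Option Int :=
  match q with
  | [] => some (-1)
  | (c, b) :: rest =>
    if c ∈ allowed then
      match PySem.List.pyGet? languages c with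
      | none => none
      | some v =>
        if v = language then some b
        else
          let vis' := PySem.Set.add vis c
          match PySem.Dict.get? g c with
          | some subs =>
              pvLoopA g languages language allowed
                (rest ++ (subs.filter (fun s => !PySem.Set.contains vis' s)).map (fun s => (s, b + 1)))
                vis'
          | none => pvLoopA g languages language allowed rest vis'
    else
      pvLoopA g languages language allowed rest vis
termination_by ((allowed.filter (fun a => !decide (a ∈ vis))).length,
  (q.filter (fun e => decide (e.1 ∈ vis))).length, q.length)
decreasing_by
  · by_cases hc : c ∈ vis
    · rw [PySem.Set.add_of_mem hc]
      apply Prod.Lex.right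
      apply Prod.Lex.left
      have hpush : List.filter (fun e : Int × Int => decide (e.1 ∈ vis))
          ((subs.filter (fun s => !PySem.Set.contains vis s)).map (fun s => (s, b + 1))) = [] := by
        refine List.filter_eq_nil_iff.mpr ?_
        intro e hmem
        obtain ⟨s', hs', heq⟩ := List.mem_map.mp hmem
        subst heq
        obtain ⟨-, hs2⟩ := List.mem_filter.mp hs'
        have : s' ∉ vis := by simpa using hs2
        simpa using this
      simp only [List.filter_append, hpush, List.length_append, List.length_nil,
        List.filter_cons, decide_eq_true_eq, hc, if_true, List.length_cons]
      omega
    · apply Prod.Lex.left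
      refine pvFilterLt (c := c) ?_ ‹c ∈ allowed› (by simpa using hc)
        (by simp [PySem.Set.mem_add])
      intro a ha
      simp only [Bool.not_eq_true', decide_eq_false_iff_not] at ha ⊢
      exact fun hm => ha ((PySem.Set.mem_add vis c a).mpr (Or.inl hm))
  · by_cases hc : c ∈ vis
    · rw [PySem.Set.add_of_mem hc]
      apply Prod.Lex.right
      apply Prod.Lex.left
      simp only [List.filter_cons, decide_eq_true_eq, hc, if_true, List.length_cons]
      omega
    · apply Prod.Lex.left
      refine pvFilterLt (c := c) ?_ ‹c ∈ allowed› (by simpa using hc)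
        (by simp [PySem.Set.mem_add])
      intro a ha
      simp only [Bool.not_eq_true', decide_eq_false_iff_not] at ha ⊢
      exact fun hm => ha ((PySem.Set.mem_add vis c a).mpr (Or.inl hm))
  · by_cases hc : c ∈ vis
    · apply Prod.Lex.right
      apply Prod.Lex.left
      simp only [List.filter_cons, decide_eq_true_eq, hc, if_true, List.length_cons]
      omega
    · apply Prod.Lex.right
      have : List.filter (fun e : Int × Int => decide (e.1 ∈ vis)) ((c, b) :: rest)
          = List.filter (fun e : Int × Int => decide (e.1 ∈ vis)) rest := by
        simp [List.filter_cons, hc]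
      rw [this]
      apply Prod.Lex.right
      simp

-- outer loop `for i in range(1, N+1): barriers.append(...)`; an exception aborts to [].
def pvOuterA (g : PySem.Dict Int (List Int)) (languages : List Int) : List Int → List Int
  | [] => []
  | i :: rest =>
    match PySem.List.pyGet? languages (i - 1) with
    | none => []
    | some language =>
      match pvLoopA g languages language (i :: pvAllSubs g) [(i, 0)] PySem.Set.empty with
      | none => []
      | some b => b :: pvOuterA g languages rest

def compute_language_barrier (N : Int) (languages : List Int) (hierarchy : List Int) : List Int :=
  match pvBuildGraphA N hierarchy with
  | none => []
  | some g => pvOuterA g languages (PySem.List.pyRange 1 (N+1) 1)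

-- ===== PORT B =====
def pvBuildGraphB (N : Int) (hierarchy : List Int) : Option (PySem.Dict Int (List Int)) :=
  (PySem.List.pyRange 0 (2*(N+1)) 2).foldl
    (fun acc i =>
      match acc with
      | none => none
      | some g =>
        match PySem.List.pyGet? hierarchy i, PySem.List.pyGet? hierarchy (i+1) with
        | some m, some s =>
            let g1 := if PySem.Dict.contains g m then g else PySem.Dict.insert g m []
            some (PySem.Dict.insert g1 m (PySem.Dict.getD g1 m [] ++ [s]))
        | _, _ => none)
    (some PySem.Dict.empty)

-- all_subs = [s for subs in graph.values() for s in subs]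
def pvAllSubsB (g : PySem.Dict Int (List Int)) : List Int := (PySem.Dict.values g).flatten

-- phase 1 inner loop: `for c in graph.get(x,[]): if c not in seen: …` over state (stack, nodes, seen).
-- `c ∈ allowed` is a totality guard for the closure's termination measure; on every call reachable
-- from compute_language_barrier_alt it is true (every child is a stored subordinate).
def pvPushB (allowed : List Int) : List Int → List Int × List Int × PySem.Set Int → List Int × List Int × PySem.Set Int
  | [], st => st
  | c :: cs, (stack, nodes, seen) =>
    if PySem.Set.contains seen c || !decide (c ∈ allowed) then
      pvPushB allowed cs (stack, nodes, seen)
    else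
      pvPushB allowed cs (c :: stack, nodes ++ [c], PySem.Set.add seen c)

theorem pvPushB_seen_mono (allowed : List Int) :
    ∀ (cs : List Int) (st : List Int × List Int × PySem.Set Int) (x : Int),
      x ∈ st.2.2 → x ∈ (pvPushB allowed cs st).2.2 := by
  intro cs
  induction cs with
  | nil => intro st x h; exact h
  | cons c cs ih =>
    rintro ⟨stack, nodes, seen⟩ x h
    by_cases hc : (PySem.Set.contains seen c || !decide (c ∈ allowed)) = true
    · have hstep : pvPushB allowed (c :: cs) (stack, nodes, seen)
          = pvPushB allowed cs (stack, nodes, seen) := by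
        simp only [pvPushB]; rw [if_pos hc]
      rw [hstep]
      exact ih _ x h
    · have hstep : pvPushB allowed (c :: cs) (stack, nodes, seen)
          = pvPushB allowed cs (c :: stack, nodes ++ [c], PySem.Set.add seen c) := by
        simp only [pvPushB]; rw [if_neg hc]
      rw [hstep]
      exact ih _ x ((PySem.Set.mem_add seen c x).mpr (Or.inl h))

theorem pvPushB_cases (allowed : List Int) :
    ∀ (cs : List Int) (st : List Int × List Int × PySem.Set Int),
      ((pvPushB allowed cs st).1 = st.1 ∧ (pvPushB allowed cs st).2.2 = st.2.2) ∨
      ((allowed.filter (fun a => !PySem.Set.contains (pvPushB allowed cs st).2.2 a)).length <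
        (allowed.filter (fun a => !PySem.Set.contains st.2.2 a)).length) := by
  intro cs
  induction cs with
  | nil => intro st; exact Or.inl ⟨rfl, rfl⟩
  | cons c cs ih =>
    rintro ⟨stack, nodes, seen⟩
    by_cases hguard : (PySem.Set.contains seen c || !decide (c ∈ allowed)) = true
    · have hstep : pvPushB allowed (c :: cs) (stack, nodes, seen)
          = pvPushB allowed cs (stack, nodes, seen) := by
        simp only [pvPushB]; rw [if_pos hguard]
      rw [hstep]
      exact ih _
    · have hstep : pvPushB allowed (c :: cs) (stack, nodes, seen)
          = pvPushB allowed cs (c :: stack, nodes ++ [c], PySem.Set.add seen c) := by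
        simp only [pvPushB]; rw [if_neg hguard]
      rw [hstep]
      dsimp only
      right
      have hcseen : c ∉ seen := by
        intro hmem
        exact hguard (by simp [hmem])
      have hcal : c ∈ allowed := by
        by_contra hmem
        exact hguard (by simp [hmem])
      have hmono : ∀ a : Int, (!PySem.Set.contains (PySem.Set.add seen c) a) = true →
          (!PySem.Set.contains seen a) = true := by
        intro a ha
        simp only [Bool.not_eq_true', PySem.Set.contains_eq_listContains,
          List.contains_eq_mem, decide_eq_false_iff_not] at ha ⊢
        exact fun hm => ha ((PySem.Set.mem_add seen c a).mpr (Or.inl hm))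
      have hlt : (allowed.filter (fun a => !PySem.Set.contains (PySem.Set.add seen c) a)).length <
          (allowed.filter (fun a => !PySem.Set.contains seen a)).length := by
        refine pvFilterLt (c := c) hmono hcal (by simpa using hcseen) ?_
        simp [PySem.Set.mem_add]
      have hmono2 : ∀ a : Int,
          (!PySem.Set.contains (pvPushB allowed cs (c :: stack, nodes ++ [c], PySem.Set.add seen c)).2.2 a) = true →
          (!PySem.Set.contains (PySem.Set.add seen c) a) = true := by
        intro a ha
        simp only [Bool.not_eq_true', PySem.Set.contains_eq_listContains,
          List.contains_eq_mem, decide_eq_false_iff_not] at ha ⊢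
        exact fun hm => ha (pvPushB_seen_mono allowed cs _ a hm)
      have hle := pvFilterMono hmono2 allowed
      omega

-- phase 1: `while stack:` — pops the stack top, pushes unseen children, collects visit order.
def pvClosureB (g : PySem.Dict Int (List Int)) (allowed : List Int) :
    List Int → List Int → PySem.Set Int → List Int
  | [], nodes, _ => nodes
  | x :: stack, nodes, seen =>
    pvClosureB g allowed
      (pvPushB allowed (PySem.Dict.getD g x []) (stack, nodes, seen)).1
      (pvPushB allowed (PySem.Dict.getD g x []) (stack, nodes, seen)).2.1
      (pvPushB allowed (PySem.Dict.getD g x []) (stack, nodes, seen)).2.2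
termination_by stack nodes seen =>
  ((allowed.filter (fun a => !PySem.Set.contains seen a)).length, stack.length)
decreasing_by
  rcases pvPushB_cases allowed (PySem.Dict.getD g x []) (stack, nodes, seen) with ⟨h1, h2⟩ | h
  · rw [h1, h2]
    exact Prod.Lex.right _ (by simp)
  · exact Prod.Lex.left _ _ h

-- `for c in graph.get(x,[]): v = d[c]; if v is not None and (best is None or v < best): best = v`
-- (d[c] is total on every reachable call: c is a child of a node of the closed node set)
def pvBestB (d : PySem.Dict Int (Option Int)) : List Int → Option Int → Option Int
  | [], best => best
  | c :: cs, best =>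
    match PySem.Dict.getD d c none with
    | none => pvBestB d cs best
    | some v =>
      match best with
      | none => pvBestB d cs (some v)
      | some b => pvBestB d cs (some (if v < b then v else b))

-- one round: `nd = {}; for x in nodes: …` (`none` result = IndexError from languages[x])
def pvRoundB (languages : List Int) (target : Int) (g : PySem.Dict Int (List Int))
    (d : PySem.Dict Int (Option Int)) :
    List Int → PySem.Dict Int (Option Int) → Option (PySem.Dict Int (Option Int))
  | [], nd => some nd
  | x :: xs, nd =>
    match PySem.List.pyGet? languages x with
    | none => none
    | some v =>
      if v = target then pvRoundB languages target g d xs (PySem.Dict.insert nd x (some 0))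
      else
        match pvBestB d (PySem.Dict.getD g x []) none with
        | none => pvRoundB languages target g d xs (PySem.Dict.insert nd x none)
        | some b => pvRoundB languages target g d xs (PySem.Dict.insert nd x (some (b + 1)))

-- `for _ in range(len(nodes)): … if nd == d: break; d = nd`
def pvIterB (languages : List Int) (target : Int) (g : PySem.Dict Int (List Int))
    (nodes : List Int) : Nat → PySem.Dict Int (Option Int) → Option (PySem.Dict Int (Option Int))
  | 0, d => some d
  | fuel + 1, d =>
    match pvRoundB languages target g d nodes PySem.Dict.empty with
    | none => none
    | some nd => if nd = d then some d else pvIterB languages target g nodes fuel nd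

-- barrier(start, target); `none` = IndexError
def pvBarrierB (g : PySem.Dict Int (List Int)) (languages : List Int)
    (start target : Int) : Option Int :=
  let nodes := pvClosureB g (start :: pvAllSubsB g) [start] [start] (PySem.Set.ofList [start])
  let d0 := nodes.foldl (fun d x => PySem.Dict.insert d x none) PySem.Dict.empty
  match pvIterB languages target g nodes nodes.length d0 with
  | none => none
  | some d =>
    match PySem.Dict.getD d start none with
    | none => some (-1)
    | some r => some r

def pvOuterB (g : PySem.Dict Int (List Int)) (languages : List Int) : List Int → List Int
  | [] => []
  | i :: rest =>
    match PySem.List.pyGet? languages (i - 1) with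
    | none => []
    | some target =>
      match pvBarrierB g languages i target with
      | none => []
      | some b => b :: pvOuterB g languages rest

def compute_language_barrier_alt (N : Int) (languages : List Int) (hierarchy : List Int) : List Int :=
  match pvBuildGraphB N hierarchy with
  | none => []
  | some g => pvOuterB g languages (PySem.List.pyRange 1 (N+1) 1)

-- ===== PRECONDITION & SPEC =====
-- Pre_ excludes the inputs on which A raises an IndexError (hierarchy shorter than the 2*(N+1)
-- indices read, or languages shorter than N+1 with N ≥ 1), and — conservatively — inputs whose
-- hierarchy lists a subordinate index outside range(-len(languages), len(languages)): A still
-- returns on such an input when that subordinate is never reached by any of the BFS runs (B,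
-- which looks the language of every reachable node up, can raise there).
def Pre_compute_language_barrier (N : Int) (languages : List Int) (hierarchy : List Int) : Prop :=
  (0 ≤ N → 2*(N+1) ≤ (hierarchy.length : Int)) ∧
  (1 ≤ N → (N+1) ≤ (languages.length : Int)) ∧
  (1 ≤ N → ∀ k ∈ PySem.List.pyRange 0 (2*(N+1)) 2,
    (PySem.List.pyGet? hierarchy (k+1)).all
      (fun s => decide (-(languages.length : Int) ≤ s ∧ s < (languages.length : Int))) = true)
instance (N : Int) (languages : List Int) (hierarchy : List Int) : Decidable (Pre_compute_language_barrier N languages hierarchy) := by unfold Pre_compute_language_barrier; infer_instance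

def pvWitness_compute_language_barrier : Int × List Int × List Int := (1, ([3, 3], [0, 1, 1, 1]))

def Spec_compute_language_barrier (N : Int) (languages : List Int) (hierarchy : List Int) (out : List Int) : Prop := out = compute_language_barrier_alt N languages hierarchy
instance (N : Int) (languages : List Int) (hierarchy : List Int) (out : List Int) : Decidable (Spec_compute_language_barrier N languages hierarchy out) := by unfold Spec_compute_language_barrier; infer_instance

-- ===== CLAIM (what is proved, stated in full; the proofs are below) =====
def Claim_equal_compute_language_barrier : Prop := ∀ (N : Int) (languages : List Int) (hierarchy : List Int), Dom_compute_language_barrier N languages hierarchy → Pre_compute_language_barrier N languages hierarchy → Spec_compute_language_barrier N languages hierarchy (compute_language_barrier N languages hierarchy)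

-- ===== LEMMAS AND PROOFS =====

theorem pvWitness_ok :
    Dom_compute_language_barrier pvWitness_compute_language_barrier.1
      pvWitness_compute_language_barrier.2.1 pvWitness_compute_language_barrier.2.2 ∧
    Pre_compute_language_barrier pvWitness_compute_language_barrier.1
      pvWitness_compute_language_barrier.2.1 pvWitness_compute_language_barrier.2.2 := by
  decide

-- ---------- A-side bridge: A's FIFO BFS equals a level-synchronous BFS (proof-side only) ----------

-- every subordinate value stored in the graph is in pvAllSubs g
theorem pvMem_allSubs (g : PySem.Dict Int (List Int)) :
    ∀ (x : Int) (subs : List Int), PySem.Dict.get? g x = some subs → ∀ s ∈ subs, s ∈ pvAllSubs g := by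
  obtain ⟨items⟩ := g
  induction items with
  | nil => intro x subs h; simp [PySem.Dict.get?] at h
  | cons p rest ih =>
    rcases p with ⟨k, v⟩
    intro x subs h
    rw [PySem.Dict.get?_mk_cons] at h
    by_cases hk : (k == x) = true
    · simp only [hk, if_true, Option.some.injEq] at h
      subst h
      intro s hs
      simp [pvAllSubs, PySem.Dict.values_mk]
      exact Or.inl hs
    · simp only [hk, if_false] at h
      intro s hs
      have := ih x subs h s hs
      simp [pvAllSubs, PySem.Dict.values_mk] at this ⊢
      exact Or.inr this

theorem pvMem_getD_allSubs (g : PySem.Dict Int (List Int)) (x : Int) :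
    ∀ s ∈ PySem.Dict.getD g x [], s ∈ pvAllSubs g := by
  intro s hs
  cases hgx : PySem.Dict.get? g x with
  | none => rw [PySem.Dict.getD_eq_get?_getD, hgx] at hs; simp at hs
  | some subs =>
    rw [PySem.Dict.getD_eq_get?_getD, hgx] at hs
    exact pvMem_allSubs g x subs hgx s hs

-- `for x in frontier: if languages[x] == language: return depth` (none = IndexError)
def pvCheckLevel (languages : List Int) (language : Int) : List Int → Option Bool
  | [] => some false
  | x :: xs =>
    match PySem.List.pyGet? languages x with
    | none => none
    | some v => if v = language then some true else pvCheckLevel languages language xs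

-- second pass of a level: add to visited, collect the next frontier
def pvBuildNext (g : PySem.Dict Int (List Int)) (allowed : List Int) :
    List Int → PySem.Set Int × List Int → PySem.Set Int × List Int
  | [], st => st
  | x :: xs, (vis, acc) =>
    if x ∈ allowed then
      let vis' := PySem.Set.add vis x
      pvBuildNext g allowed xs
        (vis', acc ++ (PySem.Dict.getD g x []).filter (fun s => !PySem.Set.contains vis' s))
    else pvBuildNext g allowed xs (vis, acc)

theorem pvBuildNext_fst_mem (g : PySem.Dict Int (List Int)) (allowed : List Int) :
    ∀ (f : List Int) (vis : PySem.Set Int) (acc : List Int) (y : Int),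
      (y ∈ (pvBuildNext g allowed f (vis, acc)).1 ↔ y ∈ vis ∨ (y ∈ f ∧ y ∈ allowed)) := by
  intro f
  induction f with
  | nil => intro vis acc y; simp [pvBuildNext]
  | cons x xs ih =>
    intro vis acc y
    by_cases hx : x ∈ allowed
    · simp only [pvBuildNext, hx, if_true]
      rw [ih]
      rw [PySem.Set.mem_add]
      constructor
      · rintro ((hy | rfl) | ⟨h1, h2⟩)
        · exact Or.inl hy
        · exact Or.inr ⟨List.mem_cons_self, hx⟩
        · exact Or.inr ⟨List.mem_cons_of_mem _ h1, h2⟩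
      · rintro (hy | ⟨h1, h2⟩)
        · exact Or.inl (Or.inl hy)
        · rcases List.mem_cons.mp h1 with rfl | h1'
          · exact Or.inl (Or.inr rfl)
          · exact Or.inr ⟨h1', h2⟩
    · simp only [pvBuildNext, hx, if_false]
      rw [ih]
      constructor
      · rintro (hy | ⟨h1, h2⟩)
        · exact Or.inl hy
        · exact Or.inr ⟨List.mem_cons_of_mem _ h1, h2⟩
      · rintro (hy | ⟨h1, h2⟩)
        · exact Or.inl hy
        · rcases List.mem_cons.mp h1 with rfl | h1'
          · exact absurd h2 hx
          · exact Or.inr ⟨h1', h2⟩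

theorem pvBuildNext_fix (g : PySem.Dict Int (List Int)) (allowed : List Int) :
    ∀ (f : List Int) (vis : PySem.Set Int) (acc : List Int),
      (∀ x ∈ f, x ∈ allowed → x ∈ vis) →
      (pvBuildNext g allowed f (vis, acc)).1 = vis ∧
        ∀ y ∈ (pvBuildNext g allowed f (vis, acc)).2, y ∈ acc ∨ y ∉ vis := by
  intro f
  induction f with
  | nil => intro vis acc _; exact ⟨rfl, fun y hy => Or.inl hy⟩
  | cons x xs ih =>
    intro vis acc h
    by_cases hx : x ∈ allowed
    · have hxv : x ∈ vis := h x List.mem_cons_self hx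
      simp only [pvBuildNext, hx, if_true, PySem.Set.add_of_mem hxv]
      obtain ⟨h1, h2⟩ := ih vis _ (fun z hz => h z (List.mem_cons_of_mem _ hz))
      refine ⟨h1, fun y hy => ?_⟩
      rcases h2 y hy with hy' | hy'
      · rcases List.mem_append.mp hy' with ha | hf
        · exact Or.inl ha
        · obtain ⟨-, hf2⟩ := List.mem_filter.mp hf
          have : y ∉ vis := by simpa using hf2
          exact Or.inr this
      · exact Or.inr hy'
    · simp only [pvBuildNext, hx, if_false]
      exact ih vis acc (fun z hz => h z (List.mem_cons_of_mem _ hz))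

theorem pvBuildNext_skip (g : PySem.Dict Int (List Int)) (allowed : List Int) :
    ∀ (f : List Int) (vis : PySem.Set Int) (acc : List Int),
      (∀ x ∈ f, x ∉ allowed) → pvBuildNext g allowed f (vis, acc) = (vis, acc) := by
  intro f
  induction f with
  | nil => intro vis acc _; rfl
  | cons x xs ih =>
    intro vis acc h
    have hx : x ∉ allowed := h x List.mem_cons_self
    simp only [pvBuildNext, hx, if_false]
    exact ih vis acc (fun z hz => h z (List.mem_cons_of_mem _ hz))

-- level-synchronous BFS: one frontier per depth (proof-side intermediate between A's loop and the spec)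
def pvLoopB (g : PySem.Dict Int (List Int)) (languages : List Int) (language : Int)
    (allowed : List Int) (f : List Int) (vis : PySem.Set Int) (d : Int) : Option Int :=
  match f with
  | [] => some (-1)
  | x :: xs =>
    match pvCheckLevel languages language (x :: xs) with
    | none => none
    | some true => some d
    | some false =>
      let st := pvBuildNext g allowed (x :: xs) (vis, [])
      pvLoopB g languages language allowed st.2 st.1 (d + 1)
termination_by ((allowed.filter (fun a => !decide (a ∈ vis))).length,
  (f.filter (fun z => decide (z ∈ vis))).length, f.length)
decreasing_by
  by_cases h1 : ∃ y ∈ x :: xs, y ∈ allowed ∧ y ∉ vis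
  · obtain ⟨y, hyf, hyal, hyv⟩ := h1
    apply Prod.Lex.left
    refine pvFilterLt (c := y) ?_ hyal (by simpa using hyv) ?_
    · intro a ha
      simp only [Bool.not_eq_true', decide_eq_false_iff_not] at ha ⊢
      exact fun hm => ha ((pvBuildNext_fst_mem g allowed (x :: xs) vis [] a).mpr (Or.inl hm))
    · simp only [Bool.not_eq_false', decide_eq_true_eq, Bool.not_eq_true', decide_eq_false_iff_not]
      simp [(pvBuildNext_fst_mem g allowed (x :: xs) vis [] y).mpr (Or.inr ⟨hyf, hyal⟩)]
  · push_neg at h1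
    obtain ⟨hfst, hsnd⟩ := pvBuildNext_fix g allowed (x :: xs) vis [] (fun z hz ha => h1 z hz ha)
    rw [hfst]
    apply Prod.Lex.right
    have hsnd' : List.filter (fun z => decide (z ∈ vis)) (pvBuildNext g allowed (x :: xs) (vis, [])).2 = [] := by
      refine List.filter_eq_nil_iff.mpr ?_
      intro a ha
      rcases hsnd a ha with h | h
      · exact absurd h (List.not_mem_nil)
      · simpa using h
    by_cases h2 : ∃ y ∈ x :: xs, y ∈ vis
    · apply Prod.Lex.left
      rw [hsnd']
      obtain ⟨y, hyf, hyv⟩ := h2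
      have : y ∈ List.filter (fun z => decide (z ∈ vis)) (x :: xs) :=
        List.mem_filter.mpr ⟨hyf, by simpa using hyv⟩
      simpa using List.length_pos_of_mem this
    · push_neg at h2
      have hall : ∀ y ∈ x :: xs, y ∉ allowed := fun y hy hal => h2 y hy (h1 y hy hal)
      have hz : List.filter (fun z => decide (z ∈ vis)) (x :: xs) = [] :=
        List.filter_eq_nil_iff.mpr (by intro a ha; simpa using h2 a ha)
      rw [pvBuildNext_skip g allowed (x :: xs) vis [] hall, hz]
      apply Prod.Lex.right
      simp

-- one whole level of A's queue loop = the match scan + next-frontier build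
theorem pvLevelA (g : PySem.Dict Int (List Int)) (languages : List Int) (language : Int)
    (allowed : List Int) :
    ∀ (F Nx : List Int) (vis : PySem.Set Int) (d : Int), (∀ x ∈ F, x ∈ allowed) →
      pvLoopA g languages language allowed
          (F.map (fun x => (x, d)) ++ Nx.map (fun x => (x, d + 1))) vis =
        (match pvCheckLevel languages language F with
        | none => none
        | some true => some d
        | some false =>
          pvLoopA g languages language allowed
            ((pvBuildNext g allowed F (vis, Nx)).2.map (fun x => (x, d + 1)))
            (pvBuildNext g allowed F (vis, Nx)).1) := by
  intro F
  induction F with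
  | nil =>
    intro Nx vis d _
    simp [pvCheckLevel, pvBuildNext]
  | cons x F ih =>
    intro Nx vis d hF
    have hx : x ∈ allowed := hF x List.mem_cons_self
    conv_lhs => rw [pvLoopA.eq_def]
    simp only [List.map_cons, List.cons_append, hx, if_true]
    cases hL : PySem.List.pyGet? languages x with
    | none => simp [pvCheckLevel, hL]
    | some v =>
      by_cases hv : v = language
      · simp [pvCheckLevel, hL, hv]
      · have hcheck : pvCheckLevel languages language (x :: F) = pvCheckLevel languages language F := by
          simp [pvCheckLevel, hL, hv]
        have hbn : pvBuildNext g allowed (x :: F) (vis, Nx)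
            = pvBuildNext g allowed F (PySem.Set.add vis x,
                Nx ++ (PySem.Dict.getD g x []).filter
                  (fun s => !PySem.Set.contains (PySem.Set.add vis x) s)) := by
          simp [pvBuildNext, hx]
        rw [hcheck, hbn]
        simp only [hv, if_false]
        cases hgx : PySem.Dict.get? g x with
        | some subs =>
          have hgd : PySem.Dict.getD g x [] = subs := by
            simp [PySem.Dict.getD_eq_get?_getD, hgx]
          rw [hgd]
          have harr : (F.map (fun z => (z, d)) ++ Nx.map (fun z => (z, d + 1)))
              ++ ((subs.filter (fun s => !PySem.Set.contains (PySem.Set.add vis x) s)).map (fun s => (s, d + 1)))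
              = F.map (fun z => (z, d))
                ++ ((Nx ++ subs.filter (fun s => !PySem.Set.contains (PySem.Set.add vis x) s)).map (fun z => (z, d + 1))) := by
            rw [List.map_append, List.append_assoc]
          simp only [hgx]
          rw [harr]
          exact ih _ (PySem.Set.add vis x) d (fun z hz => hF z (List.mem_cons_of_mem _ hz))
        | none =>
          have hgd : PySem.Dict.getD g x [] = [] := by
            simp [PySem.Dict.getD_eq_get?_getD, hgx]
          rw [hgd]
          simp only [hgx, List.filter_nil, List.append_nil]
          exact ih _ (PySem.Set.add vis x) d (fun z hz => hF z (List.mem_cons_of_mem _ hz))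

theorem pvBuildNext_snd_subset (g : PySem.Dict Int (List Int)) (allowed : List Int)
    (hg : ∀ x subs, PySem.Dict.get? g x = some subs → ∀ s ∈ subs, s ∈ allowed) :
    ∀ (f : List Int) (vis : PySem.Set Int) (acc : List Int), (∀ y ∈ acc, y ∈ allowed) →
      ∀ y ∈ (pvBuildNext g allowed f (vis, acc)).2, y ∈ allowed := by
  intro f
  induction f with
  | nil => intro vis acc hacc; exact hacc
  | cons x xs ih =>
    intro vis acc hacc
    by_cases hx : x ∈ allowed
    · simp only [pvBuildNext, hx, if_true]
      refine ih _ _ ?_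
      intro y hy
      rcases List.mem_append.mp hy with h | h
      · exact hacc y h
      · obtain ⟨hmem, -⟩ := List.mem_filter.mp h
        cases hgx : PySem.Dict.get? g x with
        | none => rw [PySem.Dict.getD_eq_get?_getD, hgx] at hmem; simp at hmem
        | some subs =>
          rw [PySem.Dict.getD_eq_get?_getD, hgx] at hmem
          exact hg x subs hgx y hmem
    · simp only [pvBuildNext, hx, if_false]
      exact ih _ _ hacc

theorem pvMainEq (g : PySem.Dict Int (List Int)) (languages : List Int) (language : Int)
    (allowed : List Int)
    (hg : ∀ x subs, PySem.Dict.get? g x = some subs → ∀ s ∈ subs, s ∈ allowed) :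
    ∀ (f : List Int) (vis : PySem.Set Int) (d : Int), (∀ x ∈ f, x ∈ allowed) →
      pvLoopA g languages language allowed (f.map (fun x => (x, d))) vis =
        pvLoopB g languages language allowed f vis d := by
  intro f vis d
  induction f, vis, d using pvLoopB.induct g languages language allowed with
  | case1 vis d =>
    intro _
    simp only [List.map_nil]
    rw [pvLoopA.eq_def, pvLoopB.eq_def]
  | case2 vis d i rest hch =>
    intro hf
    have hlv := pvLevelA g languages language allowed (i :: rest) [] vis d hf
    simp only [List.map_nil, List.append_nil] at hlv
    rw [hlv]
    rw [pvLoopB.eq_def]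
    simp [hch]
  | case3 vis d i rest hch =>
    intro hf
    have hlv := pvLevelA g languages language allowed (i :: rest) [] vis d hf
    simp only [List.map_nil, List.append_nil] at hlv
    rw [hlv]
    rw [pvLoopB.eq_def]
    simp [hch]
  | case4 vis d i rest hch st ih =>
    intro hf
    have hlv := pvLevelA g languages language allowed (i :: rest) [] vis d hf
    simp only [List.map_nil, List.append_nil] at hlv
    rw [hlv]
    conv_rhs => rw [pvLoopB.eq_def]
    simp only [hch]
    exact ih (pvBuildNext_snd_subset g allowed
      (fun x subs h s hs => hg x subs h s hs) (i :: rest) vis [] (by simp))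

-- ---------- the common specification: shortest walk to a node speaking the target ----------

-- languages[x] == target (with x looked up Python-style)
def pvM (languages : List Int) (target : Int) (x : Int) : Prop :=
  PySem.List.pyGet? languages x = some target

-- there is a walk of length n from x (along graph children) ending at a matching node
def pvHit (g : PySem.Dict Int (List Int)) (languages : List Int) (target : Int)
    (x : Int) : Nat → Prop
  | 0 => pvM languages target x
  | n + 1 => ∃ y ∈ PySem.Dict.getD g x [], pvHit g languages target y n

noncomputable def pvAns (g : PySem.Dict Int (List Int)) (languages : List Int)
    (target : Int) (s : Int) : Option Nat :=
  @dite _ (∃ n, pvHit g languages target s n) (Classical.propDecidable _)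
    (fun _ => some (sInf {n | pvHit g languages target s n})) (fun _ => none)

noncomputable def pvAnsInt (g : PySem.Dict Int (List Int)) (languages : List Int)
    (target : Int) (s : Int) : Int :=
  match pvAns g languages target s with
  | none => -1
  | some m => (m : Int)

-- ys is a walk continuation of x along the graph
def pvWalkL (g : PySem.Dict Int (List Int)) : Int → List Int → Prop
  | _, [] => True
  | x, y :: ys => y ∈ PySem.Dict.getD g x [] ∧ pvWalkL g y ys

theorem pvHit_iff_walk (g : PySem.Dict Int (List Int)) (languages : List Int) (target : Int) :
    ∀ (m : Nat) (x : Int), pvHit g languages target x m ↔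
      ∃ ys, pvWalkL g x ys ∧ ys.length = m ∧ pvM languages target (ys.getLastD x) := by
  intro m
  induction m with
  | zero =>
    intro x
    constructor
    · intro h; exact ⟨[], trivial, rfl, h⟩
    · rintro ⟨ys, hw, hl, hm⟩
      rw [List.length_eq_zero_iff] at hl
      subst hl
      exact hm
  | succ n ih =>
    intro x
    constructor
    · rintro ⟨y, hy, hh⟩
      obtain ⟨ys, hw, hl, hm⟩ := (ih y).mp hh
      exact ⟨y :: ys, ⟨hy, hw⟩, by simp [hl], by rwa [List.getLastD_cons]⟩
    · rintro ⟨ys, hw, hl, hm⟩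
      cases ys with
      | nil => simp at hl
      | cons y ys' =>
        obtain ⟨hy, hw'⟩ := hw
        rw [List.getLastD_cons] at hm
        exact ⟨y, hy, (ih y).mpr ⟨ys', hw', by simpa using hl, hm⟩⟩

theorem pvGetLastD_append (u v : List Int) (d : Int) :
    (u ++ v).getLastD d = v.getLastD (u.getLastD d) := by
  induction u generalizing d with
  | nil => rfl
  | cons a u ih => rw [List.cons_append, List.getLastD_cons, List.getLastD_cons, ih]

theorem pvWalk_append (g : PySem.Dict Int (List Int)) :
    ∀ (u v : List Int) (x : Int),
      pvWalkL g x (u ++ v) ↔ pvWalkL g x u ∧ pvWalkL g (u.getLastD x) v := by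
  intro u
  induction u with
  | nil => intro v x; simp [pvWalkL]
  | cons y u ih =>
    intro v x
    rw [List.cons_append, List.getLastD_cons]
    show (y ∈ _ ∧ pvWalkL g y (u ++ v)) ↔ (y ∈ _ ∧ pvWalkL g y u) ∧ _
    rw [ih]
    tauto

theorem pvWalk_mem_closed (g : PySem.Dict Int (List Int)) (S : List Int)
    (hclosed : ∀ y ∈ S, ∀ c ∈ PySem.Dict.getD g y [], c ∈ S) :
    ∀ (ys : List Int) (x : Int), x ∈ S → pvWalkL g x ys → ∀ z ∈ ys, z ∈ S := by
  intro ys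
  induction ys with
  | nil => intro x _ _ z hz; simp at hz
  | cons y ys ih =>
    rintro x hx ⟨hy, hw⟩ z hz
    have hyS : y ∈ S := hclosed x hx y hy
    rcases List.mem_cons.mp hz with rfl | hz'
    · exact hyS
    · exact ih y hyS hw z hz'

-- any walk ending at a match shortens to a duplicate-free walk ending at a match
theorem pvWalk_short (g : PySem.Dict Int (List Int)) (languages : List Int) (target : Int) :
    ∀ (n : Nat) (x : Int) (ys : List Int), ys.length ≤ n → pvWalkL g x ys →
      pvM languages target (ys.getLastD x) →
      ∃ ys', pvWalkL g x ys' ∧ pvM languages target (ys'.getLastD x) ∧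
        ys'.length ≤ ys.length ∧ (x :: ys').Nodup ∧ ∀ z ∈ ys', z ∈ ys := by
  intro n
  induction n with
  | zero =>
    intro x ys hlen hw hm
    have : ys = [] := List.length_eq_zero_iff.mp (Nat.le_zero.mp hlen)
    subst this
    exact ⟨[], trivial, hm, le_refl _, by simp, by simp⟩
  | succ n ih =>
    intro x ys hlen hw hm
    by_cases hx : x ∈ ys
    · obtain ⟨l1, l2, rfl⟩ := List.append_of_mem hx
      rw [show l1 ++ x :: l2 = l1 ++ ([x] ++ l2) by simp] at hw hm ⊢
      rw [pvWalk_append] at hw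
      obtain ⟨-, hw2⟩ := hw
      rw [pvWalk_append] at hw2
      obtain ⟨-, hw3⟩ := hw2
      have hlast : ([x].getLastD (l1.getLastD x)) = x := rfl
      rw [hlast] at hw3
      rw [pvGetLastD_append, pvGetLastD_append, hlast] at hm
      have hlen2 : l2.length ≤ n := by
        have := hlen
        simp only [List.length_append, List.singleton_append, List.length_cons] at this
        omega
      obtain ⟨ys', h1, h2, h3, h4, h5⟩ := ih x l2 hlen2 hw3 hm
      refine ⟨ys', h1, h2, ?_, h4, ?_⟩
      · simp only [List.length_append, List.singleton_append, List.length_cons]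
        omega
      · intro z hz
        have := h5 z hz
        simp [this]
    · cases ys with
      | nil => exact ⟨[], trivial, hm, le_refl _, by simp, by simp⟩
      | cons y ys0 =>
        obtain ⟨hy, hw0⟩ := hw
        rw [List.getLastD_cons] at hm
        have hlen0 : ys0.length ≤ n := by simp at hlen; omega
        obtain ⟨ys0', h1, h2, h3, h4, h5⟩ := ih y ys0 hlen0 hw0 hm
        have hxny : x ∉ y :: ys0' := by
          intro hmem
          rcases List.mem_cons.mp hmem with rfl | hmem'
          · exact hx List.mem_cons_self
          · exact hx (List.mem_cons_of_mem _ (h5 x hmem'))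
        refine ⟨y :: ys0', ⟨hy, h1⟩, by rwa [List.getLastD_cons], by simpa using h3, ?_, ?_⟩
        · exact List.nodup_cons.mpr ⟨hxny, h4⟩
        · intro z hz
          rcases List.mem_cons.mp hz with rfl | hz'
          · exact List.mem_cons_self
          · exact List.mem_cons_of_mem _ (h5 z hz')

-- if a hit exists at all, one exists of length < |S| for any closed duplicate-free S containing s
theorem pvHit_bound (g : PySem.Dict Int (List Int)) (languages : List Int) (target : Int)
    (S : List Int) (hclosed : ∀ y ∈ S, ∀ c ∈ PySem.Dict.getD g y [], c ∈ S)
    (hnd : S.Nodup) (s : Int) (hs : s ∈ S) (n : Nat)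
    (hn : pvHit g languages target s n) :
    ∃ m, pvHit g languages target s m ∧ m ≤ n ∧ m + 1 ≤ S.length := by
  obtain ⟨ys, hw, hl, hm⟩ := (pvHit_iff_walk g languages target n s).mp hn
  obtain ⟨ys', h1, h2, h3, h4, h5⟩ := pvWalk_short g languages target ys.length s ys (le_refl _) hw hm
  refine ⟨ys'.length, (pvHit_iff_walk g languages target ys'.length s).mpr ⟨ys', h1, rfl, h2⟩,
    by omega, ?_⟩
  have hsub : (s :: ys') ⊆ S := by
    intro z hz
    rcases List.mem_cons.mp hz with rfl | hz'
    · exact hs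
    · exact pvWalk_mem_closed g S hclosed ys' s hs h1 z hz'
  calc ys'.length + 1 = (s :: ys').length := by simp
  _ = (s :: ys').toFinset.card := by rw [List.toFinset_card_of_nodup h4]
  _ ≤ S.toFinset.card := Finset.card_le_card
      (fun z hz => List.mem_toFinset.mpr (hsub (List.mem_toFinset.mp hz)))
  _ ≤ S.length := S.toFinset_card_le

-- a finite list of Option Int values has a minimal some-value (if any)
theorem pvExistsMin (f : Int → Option Int) :
    ∀ (cs : List Int), (∃ c ∈ cs, (f c).isSome) →
      ∃ c0 ∈ cs, ∃ v0, f c0 = some v0 ∧ ∀ c ∈ cs, ∀ v, f c = some v → v0 ≤ v := by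
  intro cs
  induction cs with
  | nil => rintro ⟨c, hc, -⟩; simp at hc
  | cons c cs ih =>
    intro hex
    by_cases hcs : ∃ c' ∈ cs, (f c').isSome
    · obtain ⟨c0, hc0, v0, hv0, hmin⟩ := ih hcs
      cases hfc : f c with
      | none =>
        refine ⟨c0, List.mem_cons_of_mem _ hc0, v0, hv0, ?_⟩
        intro c' hc' v hv
        rcases List.mem_cons.mp hc' with rfl | hc''
        · rw [hfc] at hv; cases hv
        · exact hmin c' hc'' v hv
      | some w =>
        by_cases hwv : w ≤ v0
        · refine ⟨c, List.mem_cons_self, w, hfc, ?_⟩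
          intro c' hc' v hv
          rcases List.mem_cons.mp hc' with rfl | hc''
          · rw [hfc] at hv; injection hv with hv; omega
          · exact le_trans hwv (hmin c' hc'' v hv)
        · refine ⟨c0, List.mem_cons_of_mem _ hc0, v0, hv0, ?_⟩
          intro c' hc' v hv
          rcases List.mem_cons.mp hc' with rfl | hc''
          · rw [hfc] at hv; injection hv with hv; omega
          · exact hmin c' hc'' v hv
    · obtain ⟨c', hc', hsome⟩ := hex
      have hcc : c' = c := by
        rcases List.mem_cons.mp hc' with rfl | hmem
        · rfl
        · exact absurd ⟨c', hmem, hsome⟩ hcs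
      subst hcc
      cases hfc : f c' with
      | none => rw [hfc] at hsome; simp at hsome
      | some w =>
        refine ⟨c', List.mem_cons_self, w, hfc, ?_⟩
        intro c'' hc'' v hv
        rcases List.mem_cons.mp hc'' with rfl | hmem
        · rw [hfc] at hv; injection hv with hv; omega
        · exact absurd ⟨c'', hmem, by simp [hv]⟩ hcs

-- ---------- A side: the level BFS computes pvAnsInt ----------

theorem pvCheckLevel_none (languages : List Int) (target : Int) :
    ∀ F, pvCheckLevel languages target F = none → ∃ x ∈ F, PySem.List.pyGet? languages x = none := by
  intro F
  induction F with
  | nil => intro h; simp [pvCheckLevel] at h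
  | cons x xs ih =>
    intro h
    simp only [pvCheckLevel] at h
    cases hL : PySem.List.pyGet? languages x with
    | none => exact ⟨x, List.mem_cons_self, hL⟩
    | some v =>
      rw [hL] at h
      by_cases hv : v = target
      · simp [hv] at h
      · simp only [hv, if_false] at h
        obtain ⟨y, hy, hy2⟩ := ih h
        exact ⟨y, List.mem_cons_of_mem _ hy, hy2⟩

theorem pvCheckLevel_true (languages : List Int) (target : Int) :
    ∀ F, pvCheckLevel languages target F = some true → ∃ x ∈ F, pvM languages target x := by
  intro F
  induction F with
  | nil => intro h; simp [pvCheckLevel] at h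
  | cons x xs ih =>
    intro h
    simp only [pvCheckLevel] at h
    cases hL : PySem.List.pyGet? languages x with
    | none => rw [hL] at h; cases h
    | some v =>
      rw [hL] at h
      by_cases hv : v = target
      · exact ⟨x, List.mem_cons_self, by rw [pvM, hL, hv]⟩
      · simp only [hv, if_false] at h
        obtain ⟨y, hy, hy2⟩ := ih h
        exact ⟨y, List.mem_cons_of_mem _ hy, hy2⟩

theorem pvCheckLevel_false (languages : List Int) (target : Int) :
    ∀ F, pvCheckLevel languages target F = some false → ∀ x ∈ F, ¬ pvM languages target x := by
  intro F
  induction F with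
  | nil => intro _ x hx; simp at hx
  | cons x xs ih =>
    intro h y hy
    simp only [pvCheckLevel] at h
    cases hL : PySem.List.pyGet? languages x with
    | none => rw [hL] at h; cases h
    | some v =>
      rw [hL] at h
      by_cases hv : v = target
      · simp [hv] at h
      · simp only [hv, if_false] at h
        rcases List.mem_cons.mp hy with rfl | hy'
        · intro hM
          rw [pvM, hL] at hM
          exact hv (Option.some.inj hM)
        · exact ih h y hy'

theorem pvBuildNext_acc_mono (g : PySem.Dict Int (List Int)) (allowed : List Int) :
    ∀ (f : List Int) (vis : PySem.Set Int) (acc : List Int) (y : Int),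
      y ∈ acc → y ∈ (pvBuildNext g allowed f (vis, acc)).2 := by
  intro f
  induction f with
  | nil => intro vis acc y h; exact h
  | cons x xs ih =>
    intro vis acc y h
    by_cases hx : x ∈ allowed
    · simp only [pvBuildNext, hx, if_true]
      exact ih _ _ y (List.mem_append.mpr (Or.inl h))
    · simp only [pvBuildNext, hx, if_false]
      exact ih _ _ y h

theorem pvBuildNext_snd_mem (g : PySem.Dict Int (List Int)) (allowed : List Int) :
    ∀ (f : List Int) (vis : PySem.Set Int) (acc : List Int) (y : Int),
      y ∈ (pvBuildNext g allowed f (vis, acc)).2 →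
      y ∈ acc ∨ ∃ x ∈ f, x ∈ allowed ∧ y ∈ PySem.Dict.getD g x [] := by
  intro f
  induction f with
  | nil => intro vis acc y h; exact Or.inl h
  | cons x xs ih =>
    intro vis acc y h
    by_cases hx : x ∈ allowed
    · simp only [pvBuildNext, hx, if_true] at h
      rcases ih _ _ y h with h' | ⟨x', hx', h1, h2⟩
      · rcases List.mem_append.mp h' with ha | hf
        · exact Or.inl ha
        · obtain ⟨hmem, -⟩ := List.mem_filter.mp hf
          exact Or.inr ⟨x, List.mem_cons_self, hx, hmem⟩
      · exact Or.inr ⟨x', List.mem_cons_of_mem _ hx', h1, h2⟩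
    · simp only [pvBuildNext, hx, if_false] at h
      rcases ih _ _ y h with h' | ⟨x', hx', h1, h2⟩
      · exact Or.inl h'
      · exact Or.inr ⟨x', List.mem_cons_of_mem _ hx', h1, h2⟩

theorem pvBuildNext_child_cover (g : PySem.Dict Int (List Int)) (allowed : List Int) :
    ∀ (f : List Int) (vis : PySem.Set Int) (acc : List Int),
      ∀ x ∈ f, x ∈ allowed → ∀ c ∈ PySem.Dict.getD g x [],
        c ∈ (pvBuildNext g allowed f (vis, acc)).1 ∨ c ∈ (pvBuildNext g allowed f (vis, acc)).2 := by
  intro f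
  induction f with
  | nil => intro vis acc x hx; simp at hx
  | cons x0 xs ih =>
    intro vis acc x hx hxal c hc
    rcases List.mem_cons.mp hx with rfl | hx'
    · simp only [pvBuildNext, hxal, if_true]
      by_cases hcv : c ∈ PySem.Set.add vis x
      · left
        rw [pvBuildNext_fst_mem]
        left
        exact hcv
      · right
        apply pvBuildNext_acc_mono
        refine List.mem_append.mpr (Or.inr (List.mem_filter.mpr ⟨hc, ?_⟩))
        simpa using hcv
    · by_cases hx0 : x0 ∈ allowed
      · simp only [pvBuildNext, hx0, if_true]
        exact ih _ _ x hx' hxal c hc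
      · simp only [pvBuildNext, hx0, if_false]
        exact ih _ _ x hx' hxal c hc

-- from any node of vis' ∪ F' a hit is realized at least as fast from some node of F'
theorem pvKey (g : PySem.Dict Int (List Int)) (languages : List Int) (target : Int)
    (F' : List Int) (vis' : PySem.Set Int)
    (hb : ∀ v ∈ vis', ¬ pvM languages target v)
    (hd : ∀ v ∈ vis', ∀ c ∈ PySem.Dict.getD g v [], c ∈ vis' ∨ c ∈ F') :
    ∀ (m : Nat) (x : Int), (x ∈ vis' ∨ x ∈ F') → pvHit g languages target x m →
      ∃ x' ∈ F', ∃ m' ≤ m, pvHit g languages target x' m' := by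
  intro m
  induction m using Nat.strong_induction_on with
  | _ m ih =>
    intro x hx hhit
    rcases hx with hv | hf
    · cases m with
      | zero => exact absurd hhit (hb x hv)
      | succ m0 =>
        obtain ⟨c, hc, hhit'⟩ := hhit
        rcases hd x hv c hc with hcv | hcf
        · obtain ⟨x', h1, m', h2, h3⟩ := ih m0 (by omega) c (Or.inl hcv) hhit'
          exact ⟨x', h1, m', by omega, h3⟩
        · exact ⟨c, hcf, m0, by omega, hhit'⟩
    · exact ⟨x, hf, m, le_refl _, hhit⟩

theorem pvLoopB_ans (g : PySem.Dict Int (List Int)) (languages : List Int) (target : Int)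
    (allowed : List Int) (s : Int)
    (h_ok : ∀ a ∈ allowed, (PySem.List.pyGet? languages a).isSome = true)
    (hg : ∀ x : Int, ∀ c ∈ PySem.Dict.getD g x [], c ∈ allowed) :
    ∀ (F : List Int) (vis : PySem.Set Int) (dep : Int), ∀ k : Nat, dep = (k : Int) →
      (∀ x ∈ F, x ∈ allowed) →
      (∀ x ∈ F, ∀ m, pvHit g languages target x m → pvHit g languages target s (k + m)) →
      (∀ v ∈ vis, ¬ pvM languages target v) →
      (∀ v ∈ vis, ∀ c ∈ PySem.Dict.getD g v [], c ∈ vis ∨ c ∈ F) →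
      (∀ n, pvHit g languages target s n →
        ∃ x ∈ F, ∃ m, pvHit g languages target x m ∧ k + m ≤ n) →
      pvLoopB g languages target allowed F vis dep = some (pvAnsInt g languages target s) := by
  intro F vis dep
  induction F, vis, dep using pvLoopB.induct g languages target allowed with
  | case1 vis d =>
    intro k hk hFal ha hb hd hE
    rw [pvLoopB.eq_def]
    have hno : ¬ ∃ n, pvHit g languages target s n := by
      rintro ⟨n, hn⟩
      obtain ⟨x, hx, -⟩ := hE n hn
      exact absurd hx (List.not_mem_nil)
    rw [pvAnsInt, pvAns, dif_neg hno]
  | case2 vis d i rest hch =>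
    intro k hk hFal ha hb hd hE
    obtain ⟨x, hx, hL⟩ := pvCheckLevel_none languages target (i :: rest) hch
    have := h_ok x (hFal x hx)
    rw [hL] at this
    cases this
  | case3 vis d i rest hch =>
    intro k hk hFal ha hb hd hE
    rw [pvLoopB.eq_def]
    simp only [hch]
    obtain ⟨x, hx, hM⟩ := pvCheckLevel_true languages target (i :: rest) hch
    have hhit : pvHit g languages target s k := by
      have := ha x hx 0 hM
      simpa using this
    have hex : ∃ n, pvHit g languages target s n := ⟨k, hhit⟩
    have hinf : sInf {n | pvHit g languages target s n} = k := by
      apply Nat.le_antisymm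
      · exact Nat.sInf_le hhit
      · have hmem := Nat.sInf_mem (s := {n | pvHit g languages target s n}) ⟨k, hhit⟩
        obtain ⟨x', hx', m', hm', hle⟩ := hE _ hmem
        omega
    rw [pvAnsInt, pvAns, dif_pos hex, hinf, hk]
  | case4 vis d i rest hch st ih =>
    intro k hk hFal ha hb hd hE
    rw [pvLoopB.eq_def]
    simp only [hch]
    have hnomatch := pvCheckLevel_false languages target (i :: rest) hch
    have hfst : ∀ y, y ∈ st.1 ↔ y ∈ vis ∨ (y ∈ i :: rest ∧ y ∈ allowed) :=
      fun y => pvBuildNext_fst_mem g allowed (i :: rest) vis [] y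
    have hb' : ∀ v ∈ st.1, ¬ pvM languages target v := by
      intro v hv
      rcases (hfst v).mp hv with h | ⟨h, -⟩
      · exact hb v h
      · exact hnomatch v h
    have hd' : ∀ v ∈ st.1, ∀ c ∈ PySem.Dict.getD g v [], c ∈ st.1 ∨ c ∈ st.2 := by
      intro v hv c hc
      rcases (hfst v).mp hv with h | ⟨h, hal⟩
      · rcases hd v h c hc with h' | h'
        · exact Or.inl ((hfst c).mpr (Or.inl h'))
        · exact Or.inl ((hfst c).mpr (Or.inr ⟨h', hFal c h'⟩))
      · exact pvBuildNext_child_cover g allowed (i :: rest) vis [] v h hal c hc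
    have hFal' : ∀ x ∈ st.2, x ∈ allowed := by
      intro x hx
      rcases pvBuildNext_snd_mem g allowed (i :: rest) vis [] x hx with h | ⟨x', -, -, h2⟩
      · simp at h
      · exact hg x' x h2
    have ha' : ∀ x ∈ st.2, ∀ m, pvHit g languages target x m →
        pvHit g languages target s (k + 1 + m) := by
      intro x hx m hm
      rcases pvBuildNext_snd_mem g allowed (i :: rest) vis [] x hx with h | ⟨x', hx', -, h2⟩
      · simp at h
      · have : pvHit g languages target x' (m + 1) := ⟨x, h2, hm⟩
        have := ha x' hx' (m + 1) this
        have heq : k + (m + 1) = k + 1 + m := by omega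
        rwa [heq] at this
    have hE' : ∀ n, pvHit g languages target s n →
        ∃ x ∈ st.2, ∃ m, pvHit g languages target x m ∧ k + 1 + m ≤ n := by
      intro n hn
      obtain ⟨x, hx, m, hm, hle⟩ := hE n hn
      cases m with
      | zero => exact absurd hm (hnomatch x hx)
      | succ m0 =>
        obtain ⟨c, hc, hhit'⟩ := hm
        rcases pvBuildNext_child_cover g allowed (i :: rest) vis [] x hx (hFal x hx) c hc with h | h
        · obtain ⟨x', h1, m', h2, h3⟩ := pvKey g languages target st.2 st.1 hb' hd' m0 c (Or.inl h) hhit'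
          exact ⟨x', h1, m', h3, by omega⟩
        · exact ⟨c, h, m0, hhit', by omega⟩
    exact ih (k + 1) (by push_cast [hk]; ring) hFal' ha' hb' hd' hE'

-- ---------- B side, phase 1: the closure computes a closed duplicate-free node list ----------

theorem pvPushB_stack_mono (allowed : List Int) :
    ∀ (cs : List Int) (st : List Int × List Int × PySem.Set Int) (y : Int),
      y ∈ st.1 → y ∈ (pvPushB allowed cs st).1 := by
  intro cs
  induction cs with
  | nil => intro st y h; exact h
  | cons c cs ih =>
    rintro ⟨stack, nodes, seen⟩ y h
    by_cases hc : (PySem.Set.contains seen c || !decide (c ∈ allowed)) = true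
    · have hstep : pvPushB allowed (c :: cs) (stack, nodes, seen)
          = pvPushB allowed cs (stack, nodes, seen) := by
        simp only [pvPushB]; rw [if_pos hc]
      rw [hstep]; exact ih _ y h
    · have hstep : pvPushB allowed (c :: cs) (stack, nodes, seen)
          = pvPushB allowed cs (c :: stack, nodes ++ [c], PySem.Set.add seen c) := by
        simp only [pvPushB]; rw [if_neg hc]
      rw [hstep]; exact ih _ y (List.mem_cons_of_mem _ h)

theorem pvPushB_nodes_mono (allowed : List Int) :
    ∀ (cs : List Int) (st : List Int × List Int × PySem.Set Int) (y : Int),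
      y ∈ st.2.1 → y ∈ (pvPushB allowed cs st).2.1 := by
  intro cs
  induction cs with
  | nil => intro st y h; exact h
  | cons c cs ih =>
    rintro ⟨stack, nodes, seen⟩ y h
    by_cases hc : (PySem.Set.contains seen c || !decide (c ∈ allowed)) = true
    · have hstep : pvPushB allowed (c :: cs) (stack, nodes, seen)
          = pvPushB allowed cs (stack, nodes, seen) := by
        simp only [pvPushB]; rw [if_pos hc]
      rw [hstep]; exact ih _ y h
    · have hstep : pvPushB allowed (c :: cs) (stack, nodes, seen)
          = pvPushB allowed cs (c :: stack, nodes ++ [c], PySem.Set.add seen c) := by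
        simp only [pvPushB]; rw [if_neg hc]
      rw [hstep]; exact ih _ y (List.mem_append.mpr (Or.inl h))

theorem pvPushB_stack_seen (allowed : List Int) :
    ∀ (cs : List Int) (st : List Int × List Int × PySem.Set Int),
      (∀ y ∈ st.1, y ∈ st.2.2) → ∀ y ∈ (pvPushB allowed cs st).1, y ∈ (pvPushB allowed cs st).2.2 := by
  intro cs
  induction cs with
  | nil => intro st h; exact h
  | cons c cs ih =>
    rintro ⟨stack, nodes, seen⟩ h
    by_cases hc : (PySem.Set.contains seen c || !decide (c ∈ allowed)) = true
    · have hstep : pvPushB allowed (c :: cs) (stack, nodes, seen)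
          = pvPushB allowed cs (stack, nodes, seen) := by
        simp only [pvPushB]; rw [if_pos hc]
      rw [hstep]; exact ih _ h
    · have hstep : pvPushB allowed (c :: cs) (stack, nodes, seen)
          = pvPushB allowed cs (c :: stack, nodes ++ [c], PySem.Set.add seen c) := by
        simp only [pvPushB]; rw [if_neg hc]
      rw [hstep]
      refine ih _ ?_
      intro y hy
      rcases List.mem_cons.mp hy with rfl | hy'
      · exact (PySem.Set.mem_add seen y y).mpr (Or.inr rfl)
      · exact (PySem.Set.mem_add seen c y).mpr (Or.inl (h y hy'))

theorem pvPushB_nodes_inv (allowed : List Int) :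
    ∀ (cs : List Int) (st : List Int × List Int × PySem.Set Int),
      (∀ y, y ∈ st.2.1 ↔ y ∈ st.2.2) → st.2.1.Nodup →
      (∀ y, y ∈ (pvPushB allowed cs st).2.1 ↔ y ∈ (pvPushB allowed cs st).2.2) ∧
      (pvPushB allowed cs st).2.1.Nodup := by
  intro cs
  induction cs with
  | nil => intro st h1 h2; exact ⟨h1, h2⟩
  | cons c cs ih =>
    rintro ⟨stack, nodes, seen⟩ h1 h2
    by_cases hc : (PySem.Set.contains seen c || !decide (c ∈ allowed)) = true
    · have hstep : pvPushB allowed (c :: cs) (stack, nodes, seen)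
          = pvPushB allowed cs (stack, nodes, seen) := by
        simp only [pvPushB]; rw [if_pos hc]
      rw [hstep]; exact ih _ h1 h2
    · have hcseen : c ∉ seen := by
        intro hmem; exact hc (by simp [hmem])
      have hstep : pvPushB allowed (c :: cs) (stack, nodes, seen)
          = pvPushB allowed cs (c :: stack, nodes ++ [c], PySem.Set.add seen c) := by
        simp only [pvPushB]; rw [if_neg hc]
      rw [hstep]
      refine ih _ ?_ ?_
      · intro y
        simp only [List.mem_append, List.mem_singleton]
        rw [h1 y, PySem.Set.mem_add]
      · rw [List.nodup_append]
        refine ⟨h2, by simp, ?_⟩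
        intro y hy z hz
        rw [List.mem_singleton] at hz
        subst hz
        intro heq
        subst heq
        exact hcseen ((h1 y).mp hy)

theorem pvPushB_seen_al (allowed : List Int) :
    ∀ (cs : List Int) (st : List Int × List Int × PySem.Set Int),
      (∀ y ∈ st.2.2, y ∈ allowed) → ∀ y ∈ (pvPushB allowed cs st).2.2, y ∈ allowed := by
  intro cs
  induction cs with
  | nil => intro st h; exact h
  | cons c cs ih =>
    rintro ⟨stack, nodes, seen⟩ h
    by_cases hc : (PySem.Set.contains seen c || !decide (c ∈ allowed)) = true
    · have hstep : pvPushB allowed (c :: cs) (stack, nodes, seen)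
          = pvPushB allowed cs (stack, nodes, seen) := by
        simp only [pvPushB]; rw [if_pos hc]
      rw [hstep]; exact ih _ h
    · have hcal : c ∈ allowed := by
        by_contra hmem; exact hc (by simp [hmem])
      have hstep : pvPushB allowed (c :: cs) (stack, nodes, seen)
          = pvPushB allowed cs (c :: stack, nodes ++ [c], PySem.Set.add seen c) := by
        simp only [pvPushB]; rw [if_neg hc]
      rw [hstep]
      refine ih _ ?_
      intro y hy
      rcases (PySem.Set.mem_add seen c y).mp hy with hy' | rfl
      · exact h y hy'
      · exact hcal

theorem pvPushB_cover (allowed : List Int) :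
    ∀ (cs : List Int) (st : List Int × List Int × PySem.Set Int),
      ∀ c ∈ cs, c ∈ allowed → c ∈ (pvPushB allowed cs st).2.2 := by
  intro cs
  induction cs with
  | nil => intro st c hc; simp at hc
  | cons c0 cs ih =>
    rintro ⟨stack, nodes, seen⟩ c hc hcal
    by_cases hc0 : (PySem.Set.contains seen c0 || !decide (c0 ∈ allowed)) = true
    · have hstep : pvPushB allowed (c0 :: cs) (stack, nodes, seen)
          = pvPushB allowed cs (stack, nodes, seen) := by
        simp only [pvPushB]; rw [if_pos hc0]
      rw [hstep]
      rcases List.mem_cons.mp hc with rfl | hc'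
      · have hcseen : c ∈ seen := by
          rcases Bool.or_eq_true_iff.mp hc0 with h | h
          · simpa using h
          · exfalso; revert h; simp [hcal]
        exact pvPushB_seen_mono allowed cs _ c hcseen
      · exact ih _ c hc' hcal
    · have hstep : pvPushB allowed (c0 :: cs) (stack, nodes, seen)
          = pvPushB allowed cs (c0 :: stack, nodes ++ [c0], PySem.Set.add seen c0) := by
        simp only [pvPushB]; rw [if_neg hc0]
      rw [hstep]
      rcases List.mem_cons.mp hc with rfl | hc'
      · exact pvPushB_seen_mono allowed cs _ c ((PySem.Set.mem_add seen c c).mpr (Or.inr rfl))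
      · exact ih _ c hc' hcal

theorem pvPushB_new_on_stack (allowed : List Int) :
    ∀ (cs : List Int) (st : List Int × List Int × PySem.Set Int) (y : Int),
      y ∈ (pvPushB allowed cs st).2.2 → y ∈ st.2.2 ∨ y ∈ (pvPushB allowed cs st).1 := by
  intro cs
  induction cs with
  | nil => intro st y h; exact Or.inl h
  | cons c cs ih =>
    rintro ⟨stack, nodes, seen⟩ y h
    by_cases hc : (PySem.Set.contains seen c || !decide (c ∈ allowed)) = true
    · have hstep : pvPushB allowed (c :: cs) (stack, nodes, seen)
          = pvPushB allowed cs (stack, nodes, seen) := by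
        simp only [pvPushB]; rw [if_pos hc]
      rw [hstep] at h ⊢
      exact ih _ y h
    · have hstep : pvPushB allowed (c :: cs) (stack, nodes, seen)
          = pvPushB allowed cs (c :: stack, nodes ++ [c], PySem.Set.add seen c) := by
        simp only [pvPushB]; rw [if_neg hc]
      rw [hstep] at h ⊢
      rcases ih _ y h with h' | h'
      · rcases (PySem.Set.mem_add seen c y).mp h' with h'' | rfl
        · exact Or.inl h''
        · exact Or.inr (pvPushB_stack_mono allowed cs _ y List.mem_cons_self)
      · exact Or.inr h'

theorem pvClosureB_props (g : PySem.Dict Int (List Int)) (allowed : List Int)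
    (hg : ∀ x : Int, ∀ c ∈ PySem.Dict.getD g x [], c ∈ allowed) :
    ∀ (stack nodes : List Int) (seen : PySem.Set Int),
      (∀ y ∈ stack, y ∈ seen) →
      (∀ y, y ∈ nodes ↔ y ∈ seen) →
      nodes.Nodup →
      (∀ y ∈ seen, y ∈ allowed) →
      (∀ y ∈ seen, y ∈ stack ∨ ∀ c ∈ PySem.Dict.getD g y [], c ∈ seen) →
      (∀ y ∈ nodes, y ∈ pvClosureB g allowed stack nodes seen) ∧
      (∀ y ∈ pvClosureB g allowed stack nodes seen, y ∈ allowed) ∧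
      (pvClosureB g allowed stack nodes seen).Nodup ∧
      (∀ y ∈ pvClosureB g allowed stack nodes seen,
        ∀ c ∈ PySem.Dict.getD g y [], c ∈ pvClosureB g allowed stack nodes seen) := by
  intro stack nodes seen
  induction stack, nodes, seen using pvClosureB.induct g allowed with
  | case1 nodes seen =>
    intro h1 h2 h3 h4 h5
    rw [pvClosureB]
    refine ⟨fun y hy => hy, fun y hy => h4 y ((h2 y).mp hy), h3, ?_⟩
    intro y hy c hc
    rcases h5 y ((h2 y).mp hy) with h | h
    · exact absurd h (List.not_mem_nil)
    · exact (h2 c).mpr (h c hc)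
  | case2 x stack nodes seen ih =>
    intro h1 h2 h3 h4 h5
    rw [pvClosureB]
    set st : List Int × List Int × PySem.Set Int := (stack, nodes, seen) with hst
    have hi1 : ∀ y ∈ (pvPushB allowed (PySem.Dict.getD g x []) st).1,
        y ∈ (pvPushB allowed (PySem.Dict.getD g x []) st).2.2 :=
      pvPushB_stack_seen allowed _ st (fun y hy => h1 y (List.mem_cons_of_mem _ hy))
    obtain ⟨hi2, hi3⟩ := pvPushB_nodes_inv allowed (PySem.Dict.getD g x []) st h2 h3
    have hi4 : ∀ y ∈ (pvPushB allowed (PySem.Dict.getD g x []) st).2.2, y ∈ allowed :=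
      pvPushB_seen_al allowed _ st h4
    have hi5 : ∀ y ∈ (pvPushB allowed (PySem.Dict.getD g x []) st).2.2,
        y ∈ (pvPushB allowed (PySem.Dict.getD g x []) st).1 ∨
        ∀ c ∈ PySem.Dict.getD g y [],
          c ∈ (pvPushB allowed (PySem.Dict.getD g x []) st).2.2 := by
      intro y hy
      rcases pvPushB_new_on_stack allowed _ st y hy with hys | hyst
      · rcases h5 y hys with hstk | hcl
        · rcases List.mem_cons.mp hstk with rfl | hstk'
          · right
            intro c hc
            exact pvPushB_cover allowed _ st c hc (hg y c hc)
          · exact Or.inl (pvPushB_stack_mono allowed _ st y hstk')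
        · right
          intro c hc
          exact pvPushB_seen_mono allowed _ st c (hcl c hc)
      · exact Or.inl hyst
    obtain ⟨c1, c2, c3, c4⟩ := ih hi1 hi2 hi3 hi4 hi5
    exact ⟨fun y hy => c1 y (pvPushB_nodes_mono allowed _ st y hy), c2, c3, c4⟩

-- ---------- B side, phase 2: the value iteration computes pvAnsInt ----------

-- semantic value of d[x] after r rounds: shortest hit within r-1 steps
noncomputable def pvVal (g : PySem.Dict Int (List Int)) (languages : List Int) (target : Int)
    (r : Nat) (x : Int) : Option Int :=
  @dite _ (∃ m, m + 1 ≤ r ∧ pvHit g languages target x m) (Classical.propDecidable _)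
    (fun _ => some ((sInf {m | pvHit g languages target x m} : Nat) : Int)) (fun _ => none)

theorem pvVal_zero (g : PySem.Dict Int (List Int)) (languages : List Int) (target : Int)
    (x : Int) : pvVal g languages target 0 x = none := by
  rw [pvVal, dif_neg]
  rintro ⟨m, hm, -⟩
  omega

theorem pvVal_none_iff (g : PySem.Dict Int (List Int)) (languages : List Int) (target : Int)
    (r : Nat) (x : Int) :
    pvVal g languages target r x = none ↔ ¬ ∃ m, m + 1 ≤ r ∧ pvHit g languages target x m := by
  rw [pvVal]
  by_cases h : ∃ m, m + 1 ≤ r ∧ pvHit g languages target x m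
  · rw [dif_pos h]; exact iff_of_false (by simp) (by simpa using h)
  · rw [dif_neg h]; exact iff_of_true rfl h

theorem pvVal_some_spec (g : PySem.Dict Int (List Int)) (languages : List Int) (target : Int)
    (r : Nat) (x : Int) (v : Int) (h : pvVal g languages target r x = some v) :
    ∃ mv : Nat, v = (mv : Int) ∧ pvHit g languages target x mv ∧ mv + 1 ≤ r ∧
      ∀ m, pvHit g languages target x m → mv ≤ m := by
  rw [pvVal] at h
  by_cases hex : ∃ m, m + 1 ≤ r ∧ pvHit g languages target x m
  · rw [dif_pos hex] at h
    injection h with h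
    obtain ⟨m0, hm0, hhit0⟩ := hex
    refine ⟨sInf {m | pvHit g languages target x m}, h.symm, ?_, ?_, ?_⟩
    · exact Nat.sInf_mem ⟨m0, hhit0⟩
    · have := Nat.sInf_le (s := {m | pvHit g languages target x m}) hhit0
      omega
    · exact fun m hm => Nat.sInf_le hm
  · rw [dif_neg hex] at h
    cases h

theorem pvVal_some_intro (g : PySem.Dict Int (List Int)) (languages : List Int) (target : Int)
    (r : Nat) (x : Int) (m : Nat) (hm : pvHit g languages target x m) (hr : m + 1 ≤ r) :
    pvVal g languages target r x
      = some ((sInf {m | pvHit g languages target x m} : Nat) : Int) := by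
  rw [pvVal, dif_pos ⟨m, hr, hm⟩]

theorem pvVal_match (g : PySem.Dict Int (List Int)) (languages : List Int) (target : Int)
    (r : Nat) (x : Int) (hx : pvM languages target x) :
    pvVal g languages target (r + 1) x = some 0 := by
  have hhit : pvHit g languages target x 0 := hx
  rw [pvVal_some_intro g languages target (r+1) x 0 hhit (by omega)]
  have : sInf {m | pvHit g languages target x m} = 0 := Nat.sInf_eq_zero.mpr (Or.inl hhit)
  rw [this]
  rfl

theorem pvVal_step_none (g : PySem.Dict Int (List Int)) (languages : List Int) (target : Int)
    (r : Nat) (x : Int) (hx : ¬ pvM languages target x)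
    (hall : ∀ c ∈ PySem.Dict.getD g x [], pvVal g languages target r c = none) :
    pvVal g languages target (r + 1) x = none := by
  rw [pvVal_none_iff]
  rintro ⟨m, hm, hhit⟩
  cases m with
  | zero => exact hx hhit
  | succ m0 =>
    obtain ⟨c, hc, hhit'⟩ := hhit
    have := (pvVal_none_iff g languages target r c).mp (hall c hc)
    exact this ⟨m0, by omega, hhit'⟩

theorem pvVal_step_some (g : PySem.Dict Int (List Int)) (languages : List Int) (target : Int)
    (r : Nat) (x : Int) (b0 : Int) (c0 : Int) (hx : ¬ pvM languages target x)
    (hc0 : c0 ∈ PySem.Dict.getD g x []) (hv0 : pvVal g languages target r c0 = some b0)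
    (hmin : ∀ c ∈ PySem.Dict.getD g x [], ∀ v, pvVal g languages target r c = some v → b0 ≤ v) :
    pvVal g languages target (r + 1) x = some (b0 + 1) := by
  obtain ⟨mv0, rfl, hhit0, hr0, hmin0⟩ := pvVal_some_spec g languages target r c0 b0 hv0
  have hhitx : pvHit g languages target x (mv0 + 1) := ⟨c0, hc0, hhit0⟩
  rw [pvVal_some_intro g languages target (r+1) x (mv0+1) hhitx (by omega)]
  have hle : sInf {m | pvHit g languages target x m} ≤ mv0 + 1 := Nat.sInf_le hhitx
  have hge : mv0 + 1 ≤ sInf {m | pvHit g languages target x m} := by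
    have hmem := Nat.sInf_mem (s := {m | pvHit g languages target x m}) ⟨mv0 + 1, hhitx⟩
    set ms := sInf {m | pvHit g languages target x m} with hms
    cases hmse : ms with
    | zero => rw [hmse] at hmem; exact absurd hmem hx
    | succ m0 =>
      rw [hmse] at hmem
      obtain ⟨c, hc, hhit'⟩ := hmem
      have hm0r : m0 + 1 ≤ r := by omega
      have hvc := pvVal_some_intro g languages target r c m0 hhit' hm0r
      have hble := hmin c hc _ hvc
      have hsc : sInf {m | pvHit g languages target c m} ≤ m0 := Nat.sInf_le hhit'
      have : (mv0 : Int) ≤ (sInf {m | pvHit g languages target c m} : Nat) := hble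
      omega
  have : sInf {m | pvHit g languages target x m} = mv0 + 1 := by omega
  rw [this]
  push_cast
  ring_nf

theorem pvVal_cong (g : PySem.Dict Int (List Int)) (languages : List Int) (target : Int)
    (a b : Nat) (x : Int)
    (h : ∀ c ∈ PySem.Dict.getD g x [], pvVal g languages target a c = pvVal g languages target b c) :
    pvVal g languages target (a + 1) x = pvVal g languages target (b + 1) x := by
  by_cases hx : pvM languages target x
  · rw [pvVal_match g languages target a x hx, pvVal_match g languages target b x hx]
  · by_cases hex : ∃ c ∈ PySem.Dict.getD g x [], (pvVal g languages target a c).isSome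
    · obtain ⟨c0, hc0, v0, hv0, hmin⟩ :=
        pvExistsMin (fun c => pvVal g languages target a c) (PySem.Dict.getD g x []) hex
      rw [pvVal_step_some g languages target a x v0 c0 hx hc0 hv0 hmin,
        pvVal_step_some g languages target b x v0 c0 hx hc0 (by rw [← h c0 hc0]; exact hv0)
          (fun c hc v hv => hmin c hc v (by rw [h c hc]; exact hv))]
    · push_neg at hex
      have hall : ∀ c ∈ PySem.Dict.getD g x [], pvVal g languages target a c = none := by
        intro c hc
        have := hex c hc
        cases hv : pvVal g languages target a c with
        | none => rfl
        | some v => rw [hv] at this; simp at this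
      rw [pvVal_step_none g languages target a x hx hall,
        pvVal_step_none g languages target b x hx
          (fun c hc => by rw [← h c hc]; exact hall c hc)]

theorem pvVal_stab (g : PySem.Dict Int (List Int)) (languages : List Int) (target : Int)
    (S : List Int) (hclosed : ∀ y ∈ S, ∀ c ∈ PySem.Dict.getD g y [], c ∈ S) (r : Nat)
    (h : ∀ x ∈ S, pvVal g languages target (r + 1) x = pvVal g languages target r x) :
    ∀ (j : Nat), ∀ x ∈ S, pvVal g languages target (r + j) x = pvVal g languages target r x := by
  intro j
  induction j with
  | zero => intro x _; rfl
  | succ j ih =>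
    intro x hx
    have : r + (j + 1) = (r + j) + 1 := by omega
    rw [this]
    calc pvVal g languages target ((r + j) + 1) x
        = pvVal g languages target (r + 1) x :=
          pvVal_cong g languages target (r + j) r x (fun c hc => ih c (hclosed x hx c hc))
      _ = pvVal g languages target r x := h x hx

theorem pvVal_limit (g : PySem.Dict Int (List Int)) (languages : List Int) (target : Int)
    (S : List Int) (hclosed : ∀ y ∈ S, ∀ c ∈ PySem.Dict.getD g y [], c ∈ S)
    (hnd : S.Nodup) (s : Int) (hs : s ∈ S) :
    pvVal g languages target S.length s
      = match pvAns g languages target s with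
        | none => none
        | some m => some ((m : Nat) : Int) := by
  by_cases hex : ∃ n, pvHit g languages target s n
  · obtain ⟨n, hn⟩ := hex
    obtain ⟨m, hm, -, hmlen⟩ := pvHit_bound g languages target S hclosed hnd s hs n hn
    rw [pvVal_some_intro g languages target S.length s m hm hmlen]
    rw [pvAns, dif_pos ⟨n, hn⟩]
  · rw [pvAns, dif_neg hex]
    rw [pvVal_none_iff]
    rintro ⟨m, -, hm⟩
    exact hex ⟨m, hm⟩

theorem pvBestB_eq_none (d : PySem.Dict Int (Option Int)) :
    ∀ (cs : List Int) (best : Option Int),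
      pvBestB d cs best = none ↔ best = none ∧ ∀ c ∈ cs, PySem.Dict.getD d c none = none := by
  intro cs
  induction cs with
  | nil =>
    intro best
    constructor
    · intro h; exact ⟨h, by simp⟩
    · rintro ⟨h, -⟩; exact h
  | cons c cs ih =>
    intro best
    simp only [pvBestB]
    cases hgc : PySem.Dict.getD d c none with
    | none =>
      rw [ih]
      constructor
      · rintro ⟨h1, h2⟩
        refine ⟨h1, ?_⟩
        intro c' hc'
        rcases List.mem_cons.mp hc' with rfl | hc''
        · exact hgc
        · exact h2 c' hc''
      · rintro ⟨h1, h2⟩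
        exact ⟨h1, fun c' hc' => h2 c' (List.mem_cons_of_mem _ hc')⟩
    | some v =>
      cases best with
      | none =>
        rw [ih]
        constructor
        · rintro ⟨h1, -⟩; cases h1
        · rintro ⟨-, h2⟩
          have := h2 c List.mem_cons_self
          rw [hgc] at this
          cases this
      | some b =>
        rw [ih]
        constructor
        · rintro ⟨h1, -⟩; cases h1
        · rintro ⟨h1, -⟩; cases h1

theorem pvBestB_some_spec (d : PySem.Dict Int (Option Int)) :
    ∀ (cs : List Int) (best : Option Int) (b : Int),
      pvBestB d cs best = some b →
      (best = some b ∨ ∃ c ∈ cs, PySem.Dict.getD d c none = some b) ∧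
      (∀ v, best = some v → b ≤ v) ∧
      (∀ c ∈ cs, ∀ v, PySem.Dict.getD d c none = some v → b ≤ v) := by
  intro cs
  induction cs with
  | nil =>
    intro best b h
    simp only [pvBestB] at h
    refine ⟨Or.inl h, ?_, by simp⟩
    intro v hv
    rw [h] at hv
    injection hv with hv
    omega
  | cons c cs ih =>
    intro best b h
    simp only [pvBestB] at h
    cases hgc : PySem.Dict.getD d c none with
    | none =>
      rw [hgc] at h
      obtain ⟨h1, h2, h3⟩ := ih best b h
      refine ⟨?_, h2, ?_⟩
      · rcases h1 with h' | ⟨c', hc', h'⟩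
        · exact Or.inl h'
        · exact Or.inr ⟨c', List.mem_cons_of_mem _ hc', h'⟩
      · intro c' hc' v hv
        rcases List.mem_cons.mp hc' with rfl | hc''
        · rw [hgc] at hv; cases hv
        · exact h3 c' hc'' v hv
    | some w =>
      rw [hgc] at h
      cases best with
      | none =>
        obtain ⟨h1, h2, h3⟩ := ih (some w) b h
        have hbw : b ≤ w := h2 w rfl
        refine ⟨?_, by rintro v ⟨⟩, ?_⟩
        · rcases h1 with h' | ⟨c', hc', h'⟩
          · injection h' with h'
            subst h'
            exact Or.inr ⟨c, List.mem_cons_self, hgc⟩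
          · exact Or.inr ⟨c', List.mem_cons_of_mem _ hc', h'⟩
        · intro c' hc' v hv
          rcases List.mem_cons.mp hc' with rfl | hc''
          · rw [hgc] at hv; injection hv with hv; omega
          · exact h3 c' hc'' v hv
      | some b0 =>
        obtain ⟨h1, h2, h3⟩ := ih (some (if w < b0 then w else b0)) b h
        have hble : b ≤ if w < b0 then w else b0 := h2 _ rfl
        have hbw : b ≤ w := by split at hble <;> omega
        have hbb0 : b ≤ b0 := by split at hble <;> omega
        refine ⟨?_, ?_, ?_⟩
        · rcases h1 with h' | ⟨c', hc', h'⟩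
          · injection h' with h'
            by_cases hwb : w < b0
            · rw [if_pos hwb] at h'
              subst h'
              exact Or.inr ⟨c, List.mem_cons_self, hgc⟩
            · rw [if_neg hwb] at h'
              subst h'
              exact Or.inl rfl
          · exact Or.inr ⟨c', List.mem_cons_of_mem _ hc', h'⟩
        · intro v hv
          injection hv with hv
          omega
        · intro c' hc' v hv
          rcases List.mem_cons.mp hc' with rfl | hc''
          · rw [hgc] at hv; injection hv with hv; omega
          · exact h3 c' hc'' v hv

theorem pvRoundB_sem (languages : List Int) (target : Int) (g : PySem.Dict Int (List Int))
    (d : PySem.Dict Int (Option Int)) (S : List Int) (r : Nat)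
    (h_ok : ∀ x ∈ S, (PySem.List.pyGet? languages x).isSome = true)
    (hclosed : ∀ x ∈ S, ∀ c ∈ PySem.Dict.getD g x [], c ∈ S)
    (hd : ∀ c ∈ S, PySem.Dict.getD d c none = pvVal g languages target r c) :
    ∀ (xs : List Int) (nd : PySem.Dict Int (Option Int)), (∀ x ∈ xs, x ∈ S) →
      ∃ nd', pvRoundB languages target g d xs nd = some nd' ∧
        (∀ y, y ∉ xs → PySem.Dict.getD nd' y none = PySem.Dict.getD nd y none) ∧
        (∀ x ∈ xs, PySem.Dict.getD nd' x none = pvVal g languages target (r + 1) x) := by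
  intro xs
  induction xs with
  | nil =>
    intro nd _
    exact ⟨nd, rfl, fun y _ => rfl, by simp⟩
  | cons x xs ih =>
    intro nd hxs
    have hxS : x ∈ S := hxs x List.mem_cons_self
    have hsome := h_ok x hxS
    cases hL : PySem.List.pyGet? languages x with
    | none => rw [hL] at hsome; cases hsome
    | some v =>
      simp only [pvRoundB, hL]
      by_cases hv : v = target
      · rw [if_pos hv]
        have hM : pvM languages target x := by rw [pvM, hL, hv]
        obtain ⟨nd', h1, h2, h3⟩ := ih (PySem.Dict.insert nd x (some (0 : Int)))
          (fun z hz => hxs z (List.mem_cons_of_mem _ hz))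
        refine ⟨nd', h1, ?_, ?_⟩
        · intro y hy
          rw [h2 y (fun hmem => hy (List.mem_cons_of_mem _ hmem))]
          rw [PySem.Dict.getD_insert]
          rw [if_neg (fun heq => hy (by rw [heq]; exact List.mem_cons_self))]
        · intro x' hx'
          rcases List.mem_cons.mp hx' with rfl | hx''
          · by_cases hxin : x' ∈ xs
            · exact h3 x' hxin
            · rw [h2 x' hxin, PySem.Dict.getD_insert, if_pos rfl,
                pvVal_match g languages target r x' hM]
          · exact h3 x' hx''
      · rw [if_neg hv]
        have hM : ¬ pvM languages target x := by
          rw [pvM, hL]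
          intro hc
          exact hv (Option.some.inj hc)
        have hdch : ∀ c ∈ PySem.Dict.getD g x [],
            PySem.Dict.getD d c none = pvVal g languages target r c :=
          fun c hc => hd c (hclosed x hxS c hc)
        have hnext : ∀ (w : Option Int),
            PySem.Dict.getD (PySem.Dict.insert nd x w) x none = pvVal g languages target (r + 1) x →
            ∃ nd', pvRoundB languages target g d xs (PySem.Dict.insert nd x w)
              = some nd' ∧
              (∀ y, y ∉ x :: xs → PySem.Dict.getD nd' y none = PySem.Dict.getD nd y none) ∧
              (∀ x' ∈ x :: xs, PySem.Dict.getD nd' x' none = pvVal g languages target (r + 1) x') := by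
          intro w hval
          obtain ⟨nd', h1, h2, h3⟩ := ih (PySem.Dict.insert nd x w)
            (fun z hz => hxs z (List.mem_cons_of_mem _ hz))
          refine ⟨nd', h1, ?_, ?_⟩
          · intro y hy
            rw [h2 y (fun hmem => hy (List.mem_cons_of_mem _ hmem))]
            rw [PySem.Dict.getD_insert]
            rw [if_neg (fun heq' => hy (by rw [heq']; exact List.mem_cons_self))]
          · intro x' hx'
            rcases List.mem_cons.mp hx' with rfl | hx''
            · by_cases hxin : x' ∈ xs
              · exact h3 x' hxin
              · rw [h2 x' hxin]
                exact hval
            · exact h3 x' hx''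
        cases hbest : pvBestB d (PySem.Dict.getD g x []) none with
        | none =>
          obtain ⟨-, hall⟩ := (pvBestB_eq_none d (PySem.Dict.getD g x []) none).mp hbest
          refine hnext none ?_
          rw [PySem.Dict.getD_insert, if_pos rfl]
          rw [pvVal_step_none g languages target r x hM
            (fun c hc => by rw [← hdch c hc]; exact hall c hc)]
        | some b =>
          obtain ⟨h1, -, h3⟩ := pvBestB_some_spec d (PySem.Dict.getD g x []) none b hbest
          rcases h1 with h1' | ⟨c0, hc0, hv0⟩
          · cases h1'
          · refine hnext (some (b + 1)) ?_
            rw [PySem.Dict.getD_insert, if_pos rfl]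
            rw [pvVal_step_some g languages target r x b c0 hM hc0
              (by rw [← hdch c0 hc0]; exact hv0)
              (fun c hc vv hvv => h3 c hc vv (by rw [hdch c hc]; exact hvv))]
  
theorem pvIterB_sem (languages : List Int) (target : Int) (g : PySem.Dict Int (List Int))
    (S : List Int)
    (h_ok : ∀ x ∈ S, (PySem.List.pyGet? languages x).isSome = true)
    (hclosed : ∀ x ∈ S, ∀ c ∈ PySem.Dict.getD g x [], c ∈ S) :
    ∀ (fuel : Nat) (r : Nat) (d : PySem.Dict Int (Option Int)),
      (∀ x ∈ S, PySem.Dict.getD d x none = pvVal g languages target r x) →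
      ∃ d', pvIterB languages target g S fuel d = some d' ∧
        ∀ x ∈ S, PySem.Dict.getD d' x none = pvVal g languages target (r + fuel) x := by
  intro fuel
  induction fuel with
  | zero =>
    intro r d hd
    exact ⟨d, rfl, fun x hx => hd x hx⟩
  | succ fuel ih =>
    intro r d hd
    obtain ⟨nd, h1, -, h3⟩ := pvRoundB_sem languages target g d S r h_ok hclosed hd S
      PySem.Dict.empty (fun x hx => hx)
    simp only [pvIterB, h1]
    by_cases heq : nd = d
    · rw [if_pos heq]
      refine ⟨d, rfl, ?_⟩
      intro x hx
      have hstab := pvVal_stab g languages target S hclosed r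
        (fun y hy => by rw [← h3 y hy, heq, hd y hy]) (fuel + 1) x hx
      rw [hstab, hd x hx]
    · rw [if_neg heq]
      obtain ⟨d', hh1, hh2⟩ := ih (r + 1) nd (fun x hx => h3 x hx)
      refine ⟨d', hh1, ?_⟩
      intro x hx
      rw [hh2 x hx]
      congr 1
      omega

theorem pvFoldInsertNone :
    ∀ (l : List Int) (d : PySem.Dict Int (Option Int)),
      (∀ y : Int, PySem.Dict.getD d y none = none) →
      ∀ x : Int, PySem.Dict.getD
        (l.foldl (fun d x => PySem.Dict.insert d x none) d) x none = none := by
  intro l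
  induction l with
  | nil => intro d h x; exact h x
  | cons z l ih =>
    intro d h x
    refine ih _ ?_ x
    intro y
    rw [PySem.Dict.getD_insert]
    split
    · rfl
    · exact h y

theorem pvBarrierB_ans (g : PySem.Dict Int (List Int)) (languages : List Int)
    (start target : Int)
    (h_ok : ∀ a ∈ start :: pvAllSubs g, (PySem.List.pyGet? languages a).isSome = true) :
    pvBarrierB g languages start target = some (pvAnsInt g languages target start) := by
  have hg : ∀ x : Int, ∀ c ∈ PySem.Dict.getD g x [], c ∈ start :: pvAllSubs g :=
    fun x c hc => List.mem_cons_of_mem _ (pvMem_getD_allSubs g x c hc)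
  obtain ⟨c1, c2, c3, c4⟩ := pvClosureB_props g (start :: pvAllSubs g) hg
    [start] [start] (PySem.Set.ofList [start])
    (by intro y hy; rcases List.mem_singleton.mp hy with rfl
        exact (PySem.Set.mem_ofList _ _).mpr (List.mem_singleton.mpr rfl))
    (by intro y
        rw [PySem.Set.mem_ofList])
    (by simp)
    (by intro y hy
        rcases (PySem.Set.mem_ofList _ _).mp hy with h
        rcases List.mem_singleton.mp h with rfl
        exact List.mem_cons_self)
    (by intro y hy
        left
        rcases (PySem.Set.mem_ofList _ _).mp hy with h
        exact h)
  set S := pvClosureB g (start :: pvAllSubs g) [start] [start] (PySem.Set.ofList [start]) with hS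
  have hstartS : start ∈ S := c1 start (List.mem_singleton.mpr rfl)
  have h_okS : ∀ x ∈ S, (PySem.List.pyGet? languages x).isSome = true :=
    fun x hx => h_ok x (c2 x hx)
  have hd0 : ∀ x ∈ S, PySem.Dict.getD
      (S.foldl (fun d x => PySem.Dict.insert d x none) PySem.Dict.empty) x none
      = pvVal g languages target 0 x := by
    intro x _
    rw [pvVal_zero]
    exact pvFoldInsertNone S PySem.Dict.empty (fun y => by rw [PySem.Dict.getD_empty]) x
  obtain ⟨d', h1, h2⟩ := pvIterB_sem languages target g S h_okS c4 S.length 0 _ hd0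
  have hlim := pvVal_limit g languages target S c4 c3 start hstartS
  rw [pvBarrierB]
  rw [show pvAllSubsB g = pvAllSubs g from rfl, ← hS]
  simp only [h1]
  rw [h2 start hstartS]
  rw [show (0 : Nat) + S.length = S.length from by omega, hlim]
  rw [pvAnsInt]
  cases pvAns g languages target start with
  | none => rfl
  | some m => rfl

-- ---------- assembly ----------

theorem pvInRange_isSome (xs : List Int) (i : Int)
    (h1 : -(xs.length : Int) ≤ i) (h2 : i < (xs.length : Int)) :
    (PySem.List.pyGet? xs i).isSome = true := by
  cases h : PySem.List.pyGet? xs i with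
  | none =>
    have := (PySem.List.pyGet?_eq_none_iff xs i).mp h
    exact absurd (by simp [PySem.Raise.InRange]; omega) this
  | some v => rfl

theorem pvFoldGraph_none (hierarchy : List Int) :
    ∀ (l : List Int),
      (l.foldl (fun acc i =>
        match acc with
        | none => none
        | some g =>
          match PySem.List.pyGet? hierarchy i, PySem.List.pyGet? hierarchy (i+1) with
          | some m, some s =>
              let g1 := if PySem.Dict.contains g m then g else PySem.Dict.insert g m []
              some (PySem.Dict.insert g1 m (PySem.Dict.getD g1 m [] ++ [s]))
          | _, _ => none)
        (none : Option (PySem.Dict Int (List Int)))) = none := by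
  intro l
  induction l with
  | nil => rfl
  | cons k l ih => exact ih

theorem pvInsertSubs (g1 : PySem.Dict Int (List Int)) (m s : Int) (y : Int)
    (h : y ∈ pvAllSubs (PySem.Dict.insert g1 m (PySem.Dict.getD g1 m [] ++ [s]))) :
    y ∈ pvAllSubs g1 ∨ y = s := by
  rw [pvAllSubs] at h
  obtain ⟨vl, hvl, hy⟩ := List.mem_flatten.mp h
  rcases PySem.Dict.mem_values_insert g1 m (PySem.Dict.getD g1 m [] ++ [s]) vl hvl with rfl | hvl'
  · rcases List.mem_append.mp hy with h' | h'
    · exact Or.inl (pvMem_getD_allSubs g1 m y h')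
    · exact Or.inr (List.mem_singleton.mp h')
  · exact Or.inl (List.mem_flatten.mpr ⟨vl, hvl', hy⟩)

theorem pvInsertNilSubs (g : PySem.Dict Int (List Int)) (m : Int) (y : Int)
    (h : y ∈ pvAllSubs (PySem.Dict.insert g m [])) : y ∈ pvAllSubs g := by
  rw [pvAllSubs] at h
  obtain ⟨vl, hvl, hy⟩ := List.mem_flatten.mp h
  rcases PySem.Dict.mem_values_insert g m [] vl hvl with rfl | hvl'
  · simp at hy
  · exact List.mem_flatten.mpr ⟨vl, hvl', hy⟩

theorem pvBuildGraph_origin (hierarchy : List Int) :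
    ∀ (l : List Int) (g0 g' : PySem.Dict Int (List Int)),
      (l.foldl (fun acc i =>
        match acc with
        | none => none
        | some g =>
          match PySem.List.pyGet? hierarchy i, PySem.List.pyGet? hierarchy (i+1) with
          | some m, some s =>
              let g1 := if PySem.Dict.contains g m then g else PySem.Dict.insert g m []
              some (PySem.Dict.insert g1 m (PySem.Dict.getD g1 m [] ++ [s]))
          | _, _ => none)
        (some g0)) = some g' →
      ∀ y ∈ pvAllSubs g', y ∈ pvAllSubs g0 ∨
        ∃ k ∈ l, PySem.List.pyGet? hierarchy (k+1) = some y := by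
  intro l
  induction l with
  | nil =>
    intro g0 g' h y hy
    rw [List.foldl_nil] at h
    injection h with h
    subst h
    exact Or.inl hy
  | cons k l ih =>
    intro g0 g' h y hy
    rw [List.foldl_cons] at h
    cases hm : PySem.List.pyGet? hierarchy k with
    | none =>
      rw [hm] at h
      rw [pvFoldGraph_none hierarchy l] at h
      cases h
    | some m =>
      cases hs : PySem.List.pyGet? hierarchy (k+1) with
      | none =>
        rw [hm, hs] at h
        rw [pvFoldGraph_none hierarchy l] at h
        cases h
      | some s =>
        rw [hm, hs] at h
        rcases ih _ g' h y hy with h' | ⟨k', hk', hget⟩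
        · rcases pvInsertSubs _ m s y h' with h'' | rfl
          · by_cases hcont : PySem.Dict.contains g0 m
            · rw [if_pos hcont] at h''
              exact Or.inl h''
            · rw [if_neg hcont] at h''
              exact Or.inl (pvInsertNilSubs g0 m y h'')
          · exact Or.inr ⟨k, List.mem_cons_self, hs⟩
        · exact Or.inr ⟨k', List.mem_cons_of_mem _ hk', hget⟩

theorem pvOuterABeq (g : PySem.Dict Int (List Int)) (languages : List Int) :
    ∀ (is : List Int),
      (∀ i ∈ is, (PySem.List.pyGet? languages (i-1)).isSome = true ∧
        ∀ a ∈ i :: pvAllSubs g, (PySem.List.pyGet? languages a).isSome = true) →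
      pvOuterA g languages is = pvOuterB g languages is := by
  intro is
  induction is with
  | nil => intro _; rfl
  | cons i rest ih =>
    intro hyp
    obtain ⟨hi1, hi2⟩ := hyp i List.mem_cons_self
    cases hL : PySem.List.pyGet? languages (i - 1) with
    | none => rw [hL] at hi1; cases hi1
    | some target =>
      simp only [pvOuterA, pvOuterB, hL]
      have hg' : ∀ x subs, PySem.Dict.get? g x = some subs → ∀ s ∈ subs, s ∈ i :: pvAllSubs g :=
        fun x subs h s hs => List.mem_cons_of_mem _ (pvMem_allSubs g x subs h s hs)
      have hgch : ∀ x : Int, ∀ c ∈ PySem.Dict.getD g x [], c ∈ i :: pvAllSubs g :=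
        fun x c hc => List.mem_cons_of_mem _ (pvMem_getD_allSubs g x c hc)
      have hA := pvMainEq g languages target (i :: pvAllSubs g) hg' [i] PySem.Set.empty 0
        (by intro z hz
            rcases List.mem_singleton.mp hz with rfl
            exact List.mem_cons_self)
      simp only [List.map_cons, List.map_nil] at hA
      have hAans := pvLoopB_ans g languages target (i :: pvAllSubs g) i hi2 hgch
        [i] PySem.Set.empty 0 0 rfl
        (by intro z hz
            rcases List.mem_singleton.mp hz with rfl
            exact List.mem_cons_self)
        (by intro x hx m hm
            rcases List.mem_singleton.mp hx with rfl
            simpa using hm)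
        (by intro v hv; exact absurd hv (List.not_mem_nil))
        (by intro v hv; exact absurd hv (List.not_mem_nil))
        (by intro n hn
            exact ⟨i, List.mem_singleton.mpr rfl, n, hn, by omega⟩)
      have hB := pvBarrierB_ans g languages i target hi2
      rw [hA, hAans, hB]
      rw [ih (fun j hj => hyp j (List.mem_cons_of_mem _ hj))]

-- ===== VERDICT (by name: the statement is the Claim_ definition above) =====
theorem compute_language_barrier_spec : Claim_equal_compute_language_barrier := by
  intro N languages hierarchy _ pre
  unfold Spec_compute_language_barrier
  unfold compute_language_barrier compute_language_barrier_alt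
  have hb : pvBuildGraphB N hierarchy = pvBuildGraphA N hierarchy := rfl
  rw [hb]
  cases hbg : pvBuildGraphA N hierarchy with
  | none => rfl
  | some g =>
    apply pvOuterABeq
    intro i hi
    have hibd := (PySem.List.mem_pyRange_one (a := 1) (b := N + 1) (x := i)).mp hi
    have hN : 1 ≤ N := by omega
    have hlen : (N + 1 : Int) ≤ (languages.length : Int) := pre.2.1 hN
    have hlen0 : (0 : Int) ≤ (languages.length : Int) := by positivity
    constructor
    · exact pvInRange_isSome languages (i - 1) (by omega) (by omega)
    · intro a ha
      rcases List.mem_cons.mp ha with rfl | ha'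
      · exact pvInRange_isSome languages a (by omega) (by omega)
      · rcases pvBuildGraph_origin hierarchy (PySem.List.pyRange 0 (2*(N+1)) 2)
          PySem.Dict.empty g hbg a ha' with h0 | ⟨k, hk, hget⟩
        · rw [pvAllSubs] at h0
          simp [PySem.Dict.values, PySem.Dict.empty] at h0
        · have hall := pre.2.2 hN k hk
          rw [hget] at hall
          simp only [Option.all_some, decide_eq_true_eq] at hall
          exact pvInRange_isSome languages a (by omega) (by omega)
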